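-- pv_equiv track=rewrite | github.com/Xionexilem/DM2 | task1.py | analyze_tree
-- ===== SOURCE A (Python) =====
-- def analyze_tree(n, log):
--     tree = [[] for _ in range(n)]
--     stack = []
--     current_node = 0
--     node_count = 1
--
--     for char in log:
--         if char == '0':
--             stack.append(current_node)
--             tree[current_node].append(node_count)
--             tree[node_count].append(current_node)
--             current_node = node_count
--             node_count += 1
--         elif char == '1':
--             current_node = stack.pop()
--
--     def bfs(start):
--         dist = [-1] * n
--         dist[start] = 0
--         queue = [start]
--         head = 0
--         farthest_node = start
--
--         while head < len(queue):
--             node = queue[head]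
--             head += 1
--             for neighbor in tree[node]:
--                 if dist[neighbor] == -1:
--                     dist[neighbor] = dist[node] + 1
--                     queue.append(neighbor)
--                     farthest_node = neighbor
--
--         return farthest_node, dist
--
--     farthest_node, _ = bfs(0)
--     opposite_node, dist_from_farthest = bfs(farthest_node)
--     diameter = max(dist_from_farthest)
--     radius = (diameter + 1) // 2
--     center = diameter % 2 + 1
--
--     return center, radius, diameter
-- ===== SOURCE B (Python) =====
-- def analyze_tree(n, log):
--     # Parse the log into parent/depth arrays only (no adjacency lists), find the
--     # deepest node K, then compute every node's distance to K in one O(n) pass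
--     # (depth-of-LCA via a marked root-to-K path and a parent-indexed DP) instead
--     # of running two BFS sweeps; the eccentricity of K is the diameter.
--     parent = [0] * n
--     depth = [0] * n
--     stack = []
--     cur = 0
--     cnt = 1
--     for ch in log:
--         if ch == '0':
--             parent[cnt] = cur
--             depth[cnt] = depth[cur] + 1
--             stack.append(cur)
--             cur = cnt
--             cnt += 1
--         elif ch == '1':
--             cur = stack.pop()
--     m = cnt  # number of nodes actually created
--
--     # deepest node, last index on ties (= farthest node found by a BFS from 0)
--     K = 0
--     best = 0
--     for v in range(m):
--         if depth[v] >= best: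
--             best = depth[v]
--             K = v
--     # mark the path from K up to the root
--     on_path = [False] * n
--     a = K
--     while True:
--         on_path[a] = True
--         if a == 0:
--             break
--         a = parent[a]
--     # lcadep[v] = depth of lca(K, v); parent[v] < v, so a single increasing pass works
--     lcadep = [0] * n
--     ecc = 0
--     for v in range(m):
--         lcadep[v] = depth[v] if on_path[v] else lcadep[parent[v]]
--         d = depth[K] + depth[v] - 2 * lcadep[v]
--         if d > ecc:
--             ecc = d
--
--     diameter = ecc
--     radius = (diameter + 1) // 2
--     center = diameter % 2 + 1
--     return center, radius, diameter
-- ===== Notes on version B (the rewrite author's own statement) =====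
-- stated objective: alternative
-- what changed: Both BFS sweeps and the adjacency lists are gone: B parses the log into parent/depth arrays, takes the deepest node K (= the node A's first BFS finds), and computes every node's distance to K arithmetically in one linear pass, using depth(lca(K,v)) obtained by marking K's root path and a parent-indexed DP; the maximum distance is the diameter.
import Mathlib
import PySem

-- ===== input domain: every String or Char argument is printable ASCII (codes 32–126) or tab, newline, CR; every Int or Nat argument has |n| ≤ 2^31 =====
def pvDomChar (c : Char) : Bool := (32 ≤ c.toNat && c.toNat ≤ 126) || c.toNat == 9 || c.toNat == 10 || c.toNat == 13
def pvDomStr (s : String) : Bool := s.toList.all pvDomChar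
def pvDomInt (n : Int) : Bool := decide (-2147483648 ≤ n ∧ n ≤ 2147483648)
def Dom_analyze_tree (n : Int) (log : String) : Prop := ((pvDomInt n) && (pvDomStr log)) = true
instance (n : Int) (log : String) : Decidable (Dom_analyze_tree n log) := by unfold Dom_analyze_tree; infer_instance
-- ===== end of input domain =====

-- B replaces A's two BFS sweeps and adjacency lists by parent/depth arrays built
-- while parsing, a scan for the deepest node K, and one arithmetic pass computing
-- each node's distance to K through the depth of its lca with K (K's root path is
-- marked, then a parent-indexed pass fills the lca depths); max distance = diameter.
-- A's BFS loops are well-founded recursions carrying "every dist entry is ≥ -1"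
-- purely for termination.

-- ===== PORT A =====

-- one parse step of A's for-loop (Python list stack: append/pop at the end ↦ cons/head here)
def stepA (s : List (List Nat) × List Nat × Nat × Nat) (c : Char) :
    List (List Nat) × List Nat × Nat × Nat :=
  let (tree, stack, cur, cnt) := s
  if c = '0' then
    let t1 := tree.set cur (tree.getD cur [] ++ [cnt])
    let t2 := t1.set cnt (t1.getD cnt [] ++ [cur])
    (t2, cur :: stack, cnt, cnt + 1)
  else if c = '1' then (tree, stack.tail, stack.headD 0, cnt)
  else s

-- body of the inner `for neighbor in tree[node]` loop (the `nb < length` test is a totality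
-- guard: Python raises IndexError there, excluded by Pre_)
def visitA (node : Nat) (s : List Nat × List Int × Nat) (nb : Nat) : List Nat × List Int × Nat :=
  if nb < s.2.1.length ∧ s.2.1.getD nb (-1) = -1 then
    (s.1 ++ [nb], s.2.1.set nb (s.2.1.getD node (-1) + 1), nb)
  else s

-- the `while head < len(queue)` loop of A's bfs (the fuel counter is a totality
-- guard only: within Pre_ the loop runs at most N iterations, and bfsA supplies N + 1)
def bfsLoopA (tree : List (List Nat)) : Nat → List Nat → Nat → List Int → Nat → Nat × List Int
  | 0, _, _, dist, far => (far, dist)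
  | fuel + 1, q, head, dist, far =>
    if head < q.length then
      let node := q.getD head 0
      let s := (tree.getD node []).foldl (visitA node) (q, dist, far)
      bfsLoopA tree fuel s.1 (head + 1) s.2.1 s.2.2
    else (far, dist)

-- A's nested `def bfs(start)`
def bfsA (tree : List (List Nat)) (N : Nat) (start : Nat) : Nat × List Int :=
  bfsLoopA tree (N + 1) [start] 0 ((List.replicate N (-1)).set start 0) start

def analyze_tree (n : Int) (log : String) : Int × Int × Int :=
  let p := log.toList.foldl stepA (List.replicate n.toNat [], ([] : List Nat), 0, 1)
  let tree := p.1
  let r1 := bfsA tree n.toNat 0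
  let r2 := bfsA tree n.toNat r1.1
  let diameter := (PySem.List.max? r2.2 (fun x => x)).getD 0
  let radius := PySem.Int.floordiv (diameter + 1) 2
  let center := PySem.Int.mod diameter 2 + 1
  (center, radius, diameter)

-- ===== PORT B =====

-- B's parse step: parent/depth arrays instead of adjacency lists
def stepP (s : List Nat × List Nat × List Nat × Nat × Nat) (c : Char) :
    List Nat × List Nat × List Nat × Nat × Nat :=
  let (par, dep, stack, cur, cnt) := s
  if c = '0' then
    (par.set cnt cur, dep.set cnt (dep.getD cur 0 + 1), cur :: stack, cnt, cnt + 1)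
  else if c = '1' then (par, dep, stack.tail, stack.headD 0, cnt)
  else s

-- `for v in range(m): if depth[v] >= best: best, K = depth[v], v`
def deepScan (dep : List Nat) (m : Nat) : Nat × Nat :=
  (List.range m).foldl (fun b v => if b.1 ≤ dep.getD v 0 then (dep.getD v 0, v) else b) (0, 0)

-- the `while True` climb marking K's root path (fuel is a totality guard: within
-- Pre_ parent[a] < a, so fuel a+1 never runs out)
def markPath (par : List Nat) (onp : List Bool) (a : Nat) : Nat → List Bool
  | 0 => onp
  | f + 1 =>
    let onp' := onp.set a true
    if a = 0 then onp' else markPath par onp' (par.getD a 0) f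

-- body of B's final loop: fill lcadep[v] and fold the running max distance
def eccStep (par dep : List Nat) (onp : List Bool) (depK : Nat)
    (s : List Nat × Int) (v : Nat) : List Nat × Int :=
  let lc := if onp.getD v false then dep.getD v 0 else s.1.getD (par.getD v 0) 0
  let L := s.1.set v lc
  let d : Int := (depK : Int) + (dep.getD v 0 : Int) - 2 * (lc : Int)
  (L, if s.2 < d then d else s.2)

def analyze_tree_alt (n : Int) (log : String) : Int × Int × Int :=
  let p := log.toList.foldl stepP
    (List.replicate n.toNat 0, List.replicate n.toNat 0, ([] : List Nat), 0, 1)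
  let par := p.1
  let dep := p.2.1
  let m := p.2.2.2.2
  let K := (deepScan dep m).2
  let onp := markPath par (List.replicate n.toNat false) K (K + 1)
  let r := (List.range m).foldl (eccStep par dep onp (dep.getD K 0))
    (List.replicate n.toNat 0, 0)
  let diameter := r.2
  let radius := PySem.Int.floordiv (diameter + 1) 2
  let center := PySem.Int.mod diameter 2 + 1
  (center, radius, diameter)

-- ===== PRECONDITION & SPEC =====

-- Pre_ excludes exactly the inputs where Python A raises: n < 1 (dist[0] IndexError),
-- more '0' creations than the n-node arrays hold (IndexError), or a '1' with an empty
-- stack (pop from empty list).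
def Pre_analyze_tree (n : Int) (log : String) : Prop :=
  1 ≤ n ∧ ((log.toList.countP (fun c => c == '0') : Int) ≤ n - 1) ∧
  ∀ k ∈ List.range (log.toList.length + 1),
    (log.toList.take k).countP (fun c => c == '1') ≤ (log.toList.take k).countP (fun c => c == '0')

instance (n : Int) (log : String) : Decidable (Pre_analyze_tree n log) := by
  unfold Pre_analyze_tree; infer_instance

def pvWitness_analyze_tree : Int × String := (4, "0010")

def Spec_analyze_tree (n : Int) (log : String) (out : Int × Int × Int) : Prop := out = analyze_tree_alt n log
instance (n : Int) (log : String) (out : Int × Int × Int) : Decidable (Spec_analyze_tree n log out) := by unfold Spec_analyze_tree; infer_instance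

-- ===== CLAIM (what is proved, stated in full; the proofs are below) =====
def Claim_equal_analyze_tree : Prop := ∀ (n : Int) (log : String), Dom_analyze_tree n log → Pre_analyze_tree n log → Spec_analyze_tree n log (analyze_tree n log)

-- ===== LEMMAS AND PROOFS =====

-- number of -1 entries: the measure that bounds the BFS loop's iterations
def negCount (d : List Int) : Nat := d.countP (fun x => decide (x = -1))

theorem visitA_fold_bound (node : Nat) (l : List Nat) (q : List Nat) (d : List Int) (f : Nat)
    (h : ∀ x ∈ d, -1 ≤ x) :
    (∀ x ∈ (l.foldl (visitA node) (q, d, f)).2.1, -1 ≤ x) ∧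
    negCount (l.foldl (visitA node) (q, d, f)).2.1 + (l.foldl (visitA node) (q, d, f)).1.length
      ≤ negCount d + q.length := by
  induction l generalizing q d f with
  | nil => exact ⟨h, Nat.le_refl _⟩
  | cons nb t ih =>
    simp only [List.foldl_cons]
    by_cases hg : nb < d.length ∧ d.getD nb (-1) = -1
    · have hdnb : d[nb] = -1 := by
        have h2 := hg.2
        rw [List.getD_eq_getElem d (-1) hg.1] at h2
        exact h2
      have hv : visitA node (q, d, f) nb = (q ++ [nb], d.set nb (d.getD node (-1) + 1), nb) := by
        simp [visitA, hg.1, hdnb]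
      rw [hv]
      have hnode : -1 ≤ d.getD node (-1) := by
        by_cases hn : node < d.length
        · rw [List.getD_eq_getElem d (-1) hn]; exact h _ (List.getElem_mem hn)
        · rw [List.getD_eq_default d (-1) (Nat.le_of_not_lt hn)]
      have hmem : ∀ x ∈ d.set nb (d.getD node (-1) + 1), -1 ≤ x := by
        intro x hx
        rcases List.mem_or_eq_of_mem_set hx with hx' | hx'
        · exact h _ hx'
        · omega
      have hcnt : negCount (d.set nb (d.getD node (-1) + 1)) + 1 = negCount d := by
        have e1 : d.set nb (d.getD node (-1) + 1) = d.take nb ++ (d.getD node (-1) + 1) :: d.drop (nb+1) :=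
          List.set_eq_take_cons_drop _ hg.1
        have e2 : d.take nb ++ d[nb] :: d.drop (nb+1) = d := by
          rw [List.getElem_cons_drop hg.1, List.take_append_drop]
        unfold negCount
        conv_rhs => rw [← e2]
        rw [e1, List.countP_append, List.countP_append, List.countP_cons, List.countP_cons, hdnb]
        have hne : decide (d.getD node (-1) + 1 = -1) = false := by
          simp only [decide_eq_false_iff_not]; omega
        rw [if_neg (fun hh => Bool.false_ne_true (hne ▸ hh)), if_pos (by decide : decide ((-1 : Int) = -1) = true)]
        omega
      obtain ⟨ihm, ihc⟩ := ih (q ++ [nb]) _ nb hmem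
      refine ⟨ihm, ?_⟩
      have hql : (q ++ [nb]).length = q.length + 1 := by simp
      omega
    · have hv : visitA node (q, d, f) nb = (q, d, f) := by
        simp only [visitA, if_neg hg]
      rw [hv]; exact ih q d f h



-- ----- proof-only definitions: an abstract model of the parse -----

-- model parse state: (ps, stack, cur) where ps[k-1] = (parent, depth) of created node k
def mstep (s : List (Nat × Nat) × List Nat × Nat) (c : Char) : List (Nat × Nat) × List Nat × Nat :=
  let (ps, stack, cur) := s
  if c = '0' then (ps ++ [(cur, stack.length + 1)], cur :: stack, ps.length + 1)
  else if c = '1' then (ps, stack.tail, stack.headD 0)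
  else s

def dep (ps : List (Nat × Nat)) (v : Nat) : Nat := if v = 0 then 0 else (ps.getD (v - 1) (0, 0)).2
def par (ps : List (Nat × Nat)) (v : Nat) : Nat := (ps.getD (v - 1) (0, 0)).1

def addEdge (t : List (List Nat)) (p c : Nat) : List (List Nat) :=
  let t1 := t.set p (t.getD p [] ++ [c])
  t1.set c (t1.getD c [] ++ [p])

def buildTree (N : Nat) (ps : List (Nat × Nat)) : List (List Nat) :=
  ps.zipIdx.foldl (fun t pk => addEdge t pk.1.1 (pk.2 + 1)) (List.replicate N [])

-- children of v, in increasing (creation) order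
def chl (ps : List (Nat × Nat)) (v : Nat) : List Nat :=
  ((List.range ps.length).filter (fun k => (ps.getD k (0, 0)).1 == v)).map (fun k => k + 1)

-- the running (max-depth, last-argmax) pair A's first BFS effectively finds
def bestF (ps : List (Nat × Nat)) : Nat × Nat :=
  ps.zipIdx.foldl (fun b pk => if b.1 ≤ pk.1.2 then (pk.1.2, pk.2 + 1) else b) (0, 0)

-- BFS visiting order of the first BFS: strictly increasing in (depth, index)
def kless (ps : List (Nat × Nat)) (a b : Nat) : Prop :=
  dep ps a < dep ps b ∨ (dep ps a = dep ps b ∧ a < b)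

-- ----- basic model lemmas -----

theorem buildTree_append (N : Nat) (ps : List (Nat × Nat)) (x : Nat × Nat) :
    buildTree N (ps ++ [x]) = addEdge (buildTree N ps) x.1 (ps.length + 1) := by
  simp [buildTree, List.zipIdx_append, List.foldl_append]

theorem bestF_append (ps : List (Nat × Nat)) (x : Nat × Nat) :
    bestF (ps ++ [x]) = if (bestF ps).1 ≤ x.2 then (x.2, ps.length + 1) else bestF ps := by
  simp [bestF, List.zipIdx_append, List.foldl_append]

theorem dep_append (ps : List (Nat × Nat)) (x : Nat × Nat) (w : Nat) (hw : w ≤ ps.length) :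
    dep (ps ++ [x]) w = dep ps w := by
  unfold dep
  by_cases h0 : w = 0
  · simp [h0]
  · have hlt : w - 1 < ps.length := by omega
    simp [h0, List.getElem?_append_left hlt]

theorem par_append (ps : List (Nat × Nat)) (x : Nat × Nat) (w : Nat) (hw : 1 ≤ w) (hw2 : w ≤ ps.length) :
    par (ps ++ [x]) w = par ps w := by
  unfold par
  have hlt : w - 1 < ps.length := by omega
  simp [List.getElem?_append_left hlt]

theorem dep_append_new (ps : List (Nat × Nat)) (x : Nat × Nat) :
    dep (ps ++ [x]) (ps.length + 1) = x.2 := by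
  unfold dep
  simp

theorem par_append_new (ps : List (Nat × Nat)) (x : Nat × Nat) :
    par (ps ++ [x]) (ps.length + 1) = x.1 := by
  unfold par
  simp

theorem dep_big (ps : List (Nat × Nat)) (v : Nat) (hv : ps.length < v) : dep ps v = 0 := by
  unfold dep
  have h0 : ¬ v = 0 := by omega
  simp [h0, List.getD, List.getElem?_eq_none (by omega : ps.length ≤ v - 1)]

theorem par_big (ps : List (Nat × Nat)) (v : Nat) (hv : ps.length < v) : par ps v = 0 := by
  unfold par
  simp [List.getD, List.getElem?_eq_none (by omega : ps.length ≤ v - 1)]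

-- parse of A, against the model
theorem parseA_model (l : List Char) (N : Nat) (ps : List (Nat × Nat)) (stack : List Nat) (cur : Nat) :
    l.foldl stepA (buildTree N ps, stack, cur, ps.length + 1)
      = (buildTree N (l.foldl mstep (ps, stack, cur)).1,
         (l.foldl mstep (ps, stack, cur)).2.1,
         (l.foldl mstep (ps, stack, cur)).2.2,
         (l.foldl mstep (ps, stack, cur)).1.length + 1) := by
  induction l generalizing ps stack cur with
  | nil => rfl
  | cons c t ih =>
    simp only [List.foldl_cons]
    by_cases h0 : c = '0'
    · have hA : stepA (buildTree N ps, stack, cur, ps.length + 1) c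
          = (buildTree N (ps ++ [(cur, stack.length + 1)]), cur :: stack, ps.length + 1,
             (ps ++ [(cur, stack.length + 1)]).length + 1) := by
        rw [buildTree_append]
        simp [stepA, addEdge, h0]
      have hM : mstep (ps, stack, cur) c = (ps ++ [(cur, stack.length + 1)], cur :: stack, ps.length + 1) := by
        simp [mstep, h0]
      rw [hA, hM]
      exact ih _ _ _
    · by_cases h1 : c = '1'
      · have hA : stepA (buildTree N ps, stack, cur, ps.length + 1) c
            = (buildTree N ps, stack.tail, stack.headD 0, ps.length + 1) := by
          simp [stepA, h0, h1]
        have hM : mstep (ps, stack, cur) c = (ps, stack.tail, stack.headD 0) := by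
          simp [mstep, h0, h1]
        rw [hA, hM]
        exact ih _ _ _
      · have hA : stepA (buildTree N ps, stack, cur, ps.length + 1) c
            = (buildTree N ps, stack, cur, ps.length + 1) := by
          simp [stepA, h0, h1]
        have hM : mstep (ps, stack, cur) c = (ps, stack, cur) := by
          simp [mstep, h0, h1]
        rw [hA, hM]
        exact ih _ _ _

-- created-node count = number of '0' characters
theorem model_length (l : List Char) (ps : List (Nat × Nat)) (stack : List Nat) (cur : Nat) :
    (l.foldl mstep (ps, stack, cur)).1.length = ps.length + l.countP (fun c => c == '0') := by
  induction l generalizing ps stack cur with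
  | nil => simp
  | cons c t ih =>
    simp only [List.foldl_cons, List.countP_cons]
    by_cases h0 : c = '0'
    · have hM : mstep (ps, stack, cur) c = (ps ++ [(cur, stack.length + 1)], cur :: stack, ps.length + 1) := by
        simp [mstep, h0]
      rw [hM, ih]
      simp [h0]
      omega
    · by_cases h1 : c = '1'
      · have hM : mstep (ps, stack, cur) c = (ps, stack.tail, stack.headD 0) := by
          simp [mstep, h0, h1]
        rw [hM, ih]
        simp [h0]
      · have hM : mstep (ps, stack, cur) c = (ps, stack, cur) := by
          simp [mstep, h0, h1]
        rw [hM, ih]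
        simp [h0]

-- ----- invariants of the parse model -----

structure MInv (ps : List (Nat × Nat)) (stack : List Nat) (cur : Nat) : Prop where
  hcur : cur ≤ ps.length
  hstk : ∀ s ∈ stack, s ≤ ps.length
  hdepcur : dep ps cur = stack.length
  hdepstk : ∀ i, i < stack.length → dep ps (stack.getD i 0) = stack.length - 1 - i
  hpar1 : ∀ k, k < ps.length → (ps.getD k (0, 0)).1 ≤ k
  hpar2 : ∀ k, k < ps.length → (ps.getD k (0, 0)).2 = dep ps (ps.getD k (0, 0)).1 + 1
  hpar3 : ∀ k, k < ps.length → 1 ≤ (ps.getD k (0, 0)).2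
  hM4 : ∀ s ∈ cur :: stack, ∀ w, s < w → w ≤ ps.length → dep ps s < dep ps w
  hM7 : ∀ k, k < ps.length → ∀ w, (ps.getD k (0, 0)).1 < w → w < k + 1 →
          dep ps (ps.getD k (0, 0)).1 < dep ps w

theorem minv_init : MInv [] [] 0 := by
  refine ⟨by simp, by simp, by simp [dep], by simp, by simp, by simp, by simp, ?_, by simp⟩
  intro s hs w hw hw2
  simp at hs hw2
  omega

theorem minv_step (ps : List (Nat × Nat)) (stack : List Nat) (cur : Nat) (c : Char)
    (h : MInv ps stack cur) :
    MInv (mstep (ps, stack, cur) c).1 (mstep (ps, stack, cur) c).2.1 (mstep (ps, stack, cur) c).2.2 := by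
  by_cases h0 : c = '0'
  · have hM : mstep (ps, stack, cur) c = (ps ++ [(cur, stack.length + 1)], cur :: stack, ps.length + 1) := by
      simp [mstep, h0]
    rw [hM]
    show MInv (ps ++ [(cur, stack.length + 1)]) (cur :: stack) (ps.length + 1)
    set x : Nat × Nat := (cur, stack.length + 1) with hx
    have hdold : ∀ w, w ≤ ps.length → dep (ps ++ [x]) w = dep ps w := fun w hw => dep_append ps x w hw
    have hdnew : dep (ps ++ [x]) (ps.length + 1) = stack.length + 1 := dep_append_new ps x
    have hgold : ∀ k, k < ps.length → (ps ++ [x]).getD k (0, 0) = ps.getD k (0, 0) := by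
      intro k hk
      simp [List.getD, List.getElem?_append_left hk]
    have hgnew : (ps ++ [x]).getD ps.length (0, 0) = x := by
      simp [List.getD]
    refine ⟨?_, ?_, ?_, ?_, ?_, ?_, ?_, ?_, ?_⟩
    · simp
    · intro s hs
      rcases List.mem_cons.1 hs with rfl | hs'
      · have := h.hcur; simp; omega
      · have := h.hstk s hs'; simp; omega
    · rw [hdnew]; simp
    · intro i hi
      simp only [List.length_cons] at hi
      match i with
      | 0 =>
        simp only [List.getD_cons_zero]
        rw [hdold cur h.hcur, h.hdepcur]
        simp
      | Nat.succ j =>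
        simp only [List.getD_cons_succ]
        have hj : j < stack.length := by simpa using hi
        have hmem : stack.getD j 0 ∈ stack := by
          rw [List.getD_eq_getElem stack 0 hj]
          exact List.getElem_mem hj
        rw [hdold _ (h.hstk _ hmem), h.hdepstk j hj]
        simp only [List.length_cons]
        omega
    · intro k hk
      simp only [List.length_append, List.length_cons, List.length_nil] at hk
      by_cases hk' : k < ps.length
      · rw [hgold k hk']; exact h.hpar1 k hk'
      · have : k = ps.length := by simp at hk; omega
        subst this
        rw [hgnew]
        exact h.hcur
    · intro k hk
      simp only [List.length_append, List.length_cons, List.length_nil] at hk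
      by_cases hk' : k < ps.length
      · rw [hgold k hk']
        have hple : (ps.getD k (0, 0)).1 ≤ k := h.hpar1 k hk'
        rw [hdold _ (by omega)]
        exact h.hpar2 k hk'
      · have : k = ps.length := by simp at hk; omega
        subst this
        rw [hgnew, hdold cur h.hcur, h.hdepcur]
    · intro k hk
      simp only [List.length_append, List.length_cons, List.length_nil] at hk
      by_cases hk' : k < ps.length
      · rw [hgold k hk']; exact h.hpar3 k hk'
      · have : k = ps.length := by simp at hk; omega
        subst this
        rw [hgnew, hx]
        simp
    · intro s hs w hsw hwle
      simp only [List.length_append, List.length_cons, List.length_nil] at hwle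
      rcases List.mem_cons.1 hs with rfl | hs'
      · -- s is the new node ps.length + 1; no such w
        omega
      · have hsle : s ≤ ps.length := by
          rcases List.mem_cons.1 hs' with rfl | hs''
          · exact h.hcur
          · exact h.hstk s hs''
        have hdeps : dep (ps ++ [x]) s = dep ps s := hdold s hsle
        by_cases hw' : w ≤ ps.length
        · rw [hdeps, hdold w hw']
          exact h.hM4 s hs' w hsw hw'
        · have : w = ps.length + 1 := by omega
          subst this
          rw [hdeps, hdnew]
          rcases List.mem_cons.1 hs' with rfl | hs''
          · rw [h.hdepcur]; omega
          · rcases List.mem_iff_getElem.1 hs'' with ⟨i, hi, rfl⟩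
            have := h.hdepstk i hi
            rw [List.getD_eq_getElem stack 0 hi] at this
            rw [this]
            omega
    · intro k hk w hpw hwk
      simp only [List.length_append, List.length_cons, List.length_nil] at hk
      by_cases hk' : k < ps.length
      · rw [hgold k hk']
        have h1 : (ps.getD k (0, 0)).1 ≤ k := h.hpar1 k hk'
        rw [hdold _ (by omega), hdold w (by omega)]
        exact h.hM7 k hk' w (by rw [hgold k hk'] at hpw; exact hpw) hwk
      · have : k = ps.length := by simp at hk; omega
        subst this
        rw [hgnew] at hpw ⊢
        -- new edge (cur, ps.length + 1): w with cur < w ≤ ps.length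
        rw [hdold cur h.hcur, hdold w (by omega), h.hdepcur]
        have := h.hM4 cur (List.mem_cons_self) w hpw (by omega)
        rw [h.hdepcur] at this
        exact this
  · by_cases h1 : c = '1'
    · have hM : mstep (ps, stack, cur) c = (ps, stack.tail, stack.headD 0) := by
        simp [mstep, h0, h1]
      rw [hM]
      show MInv ps stack.tail (stack.headD 0)
      cases stack with
      | nil =>
        show MInv ps [] 0
        refine ⟨by simp, by simp, by simp [dep], by simp, h.hpar1, h.hpar2, h.hpar3, ?_, h.hM7⟩
        intro s hs w hsw hwle
        simp at hs
        subst hs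
        have hdw : 1 ≤ dep ps w := by
          unfold dep
          have : ¬ w = 0 := by omega
          simp only [this, if_false]
          exact h.hpar3 (w - 1) (by omega)
        have hd0 : dep ps 0 = 0 := by simp [dep]
        omega
      | cons a st =>
        show MInv ps st a
        refine ⟨?_, ?_, ?_, ?_, h.hpar1, h.hpar2, h.hpar3, ?_, h.hM7⟩
        · exact h.hstk a List.mem_cons_self
        · intro s hs
          exact h.hstk s (List.mem_cons_of_mem a (by simpa using hs))
        · have := h.hdepstk 0 (by simp)
          simpa using this
        · intro i hi
          simp only [List.tail_cons] at hi ⊢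
          have := h.hdepstk (i + 1) (by simpa using Nat.succ_lt_succ hi)
          simp only [List.getD_cons_succ, List.length_cons] at this
          rw [this]
          omega
        · intro s hs w hsw hwle
          exact h.hM4 s (List.mem_cons_of_mem cur hs) w hsw hwle
    · have hM : mstep (ps, stack, cur) c = (ps, stack, cur) := by
        simp [mstep, h0, h1]
      rw [hM]
      exact h

theorem minv_foldl (l : List Char) (ps : List (Nat × Nat)) (stack : List Nat) (cur : Nat)
    (h : MInv ps stack cur) :
    MInv (l.foldl mstep (ps, stack, cur)).1 (l.foldl mstep (ps, stack, cur)).2.1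
      (l.foldl mstep (ps, stack, cur)).2.2 := by
  induction l generalizing ps stack cur with
  | nil => exact h
  | cons c t ih =>
    simp only [List.foldl_cons]
    have hstep := minv_step ps stack cur c h
    have : mstep (ps, stack, cur) c
        = ((mstep (ps, stack, cur) c).1, (mstep (ps, stack, cur) c).2.1, (mstep (ps, stack, cur) c).2.2) := rfl
    rw [this]
    exact ih _ _ _ hstep

-- ----- adjacency characterisation of the built tree -----

theorem addEdge_length (t : List (List Nat)) (p c : Nat) : (addEdge t p c).length = t.length := by
  simp [addEdge]

theorem buildTree_length (N : Nat) (ps : List (Nat × Nat)) : (buildTree N ps).length = N := by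
  induction ps using List.reverseRecOn with
  | nil => simp [buildTree]
  | append_singleton ps x ih => rw [buildTree_append, addEdge_length]; exact ih

theorem getD_set_self {α : Type} (t : List α) (i : Nat) (a d : α) (h : i < t.length) :
    (t.set i a).getD i d = a := by
  simp [List.getD, h]

theorem getD_set_ne {α : Type} (t : List α) (i j : Nat) (a d : α) (h : i ≠ j) :
    (t.set i a).getD j d = t.getD j d := by
  simp [List.getD, List.getElem?_set, h]

theorem getD_replicate_nil (N v : Nat) : (List.replicate N ([] : List Nat)).getD v [] = [] := by
  simp [List.getD, List.getElem?_replicate]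
  split <;> rfl

theorem mem_chl (ps : List (Nat × Nat)) (v c : Nat) :
    c ∈ chl ps v ↔ (1 ≤ c ∧ c ≤ ps.length ∧ par ps c = v) := by
  unfold chl par
  constructor
  · intro hc
    rcases List.mem_map.1 hc with ⟨k, hk, rfl⟩
    rcases List.mem_filter.1 hk with ⟨hkr, hkp⟩
    have hkr' := List.mem_range.1 hkr
    refine ⟨by omega, by omega, ?_⟩
    simpa using hkp
  · rintro ⟨h1, h2, h3⟩
    refine List.mem_map.2 ⟨c - 1, ?_, by omega⟩
    refine List.mem_filter.2 ⟨List.mem_range.2 (by omega), ?_⟩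
    simpa using h3

theorem chl_sorted (ps : List (Nat × Nat)) (v : Nat) : (chl ps v).Pairwise (· < ·) := by
  unfold chl
  exact List.pairwise_map.2
    ((List.pairwise_lt_range.sublist List.filter_sublist).imp (fun hab => by omega))

theorem chl_append (ps : List (Nat × Nat)) (x : Nat × Nat) (v : Nat) :
    chl (ps ++ [x]) v = chl ps v ++ (if x.1 = v then [ps.length + 1] else []) := by
  unfold chl
  have hlen : (ps ++ [x]).length = ps.length + 1 := by simp
  rw [hlen, List.range_succ, List.filter_append, List.map_append]
  have h1 : (List.range ps.length).filter (fun k => ((ps ++ [x]).getD k (0, 0)).1 == v)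
      = (List.range ps.length).filter (fun k => (ps.getD k (0, 0)).1 == v) := by
    refine List.filter_congr ?_
    intro k hk
    have hk' := List.mem_range.1 hk
    simp [List.getD, List.getElem?_append_left hk']
  rw [h1]
  congr 1
  have hx : ((ps ++ [x]).getD ps.length (0, 0)) = x := by simp [List.getD]
  by_cases hv : x.1 = v
  · simp [hx, hv]
  · simp [hx, hv]

theorem chl_empty_of_ge (ps : List (Nat × Nat))
    (hp : ∀ k, k < ps.length → (ps.getD k (0, 0)).1 ≤ k) (v : Nat) (hv : ps.length ≤ v) :
    chl ps v = [] := by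
  rw [List.eq_nil_iff_forall_not_mem]
  intro c hc
  rcases (mem_chl ps v c).1 hc with ⟨h1, h2, h3⟩
  have := hp (c - 1) (by omega)
  unfold par at h3
  omega

theorem adj_buildTree (N : Nat) (ps : List (Nat × Nat))
    (hp : ∀ k, k < ps.length → (ps.getD k (0, 0)).1 ≤ k) (hN : ps.length < N) :
    ∀ v, (buildTree N ps).getD v []
      = (if 1 ≤ v ∧ v ≤ ps.length then [par ps v] else []) ++ chl ps v := by
  induction ps using List.reverseRecOn with
  | nil =>
    intro v
    have h0 : (buildTree N []).getD v [] = [] := getD_replicate_nil N v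
    rw [h0]
    simp [chl]
    omega
  | append_singleton ps x ih =>
    have hp' : ∀ k, k < ps.length → (ps.getD k (0, 0)).1 ≤ k := by
      intro k hk
      have := hp k (by simp; omega)
      simpa [List.getD, List.getElem?_append_left hk] using this
    have hN' : ps.length < N := by simp at hN; omega
    have hxle : x.1 ≤ ps.length := by
      have := hp ps.length (by simp)
      simpa [List.getD] using this
    have ihv := ih hp' hN'
    intro v
    rw [buildTree_append]
    show (((buildTree N ps).set x.1 ((buildTree N ps).getD x.1 [] ++ [ps.length + 1])).set
        (ps.length + 1)
        ((((buildTree N ps).set x.1 ((buildTree N ps).getD x.1 [] ++ [ps.length + 1])).getD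
            (ps.length + 1) []) ++ [x.1])).getD v []
      = _
    have hlen1 : ((buildTree N ps).set x.1 ((buildTree N ps).getD x.1 [] ++ [ps.length + 1])).length = N := by
      rw [List.length_set, buildTree_length]
    have hne : x.1 ≠ ps.length + 1 := by omega
    have ht1new : ((buildTree N ps).set x.1 ((buildTree N ps).getD x.1 [] ++ [ps.length + 1])).getD
        (ps.length + 1) [] = [] := by
      rw [getD_set_ne _ _ _ _ _ hne, ihv (ps.length + 1)]
      rw [chl_empty_of_ge ps hp' (ps.length + 1) (by omega)]
      have : ¬ (1 ≤ ps.length + 1 ∧ ps.length + 1 ≤ ps.length) := by omega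
      simp [this]
    rw [ht1new]
    have hparnew := par_append_new ps x
    have hchlapp := chl_append ps x
    by_cases hv : v = ps.length + 1
    · subst hv
      rw [getD_set_self _ _ _ _ (by rw [hlen1]; simp at hN; omega)]
      rw [hchlapp, chl_empty_of_ge ps hp' _ (by omega)]
      have hc1 : (1 ≤ ps.length + 1 ∧ ps.length + 1 ≤ (ps ++ [x]).length) := by simp
      have hc2 : x.1 ≠ ps.length + 1 := hne
      simp [hc1, hparnew, hc2]
    · rw [getD_set_ne _ _ _ _ _ (fun hh => hv hh.symm)]
      by_cases hvx : v = x.1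
      · rw [hvx, getD_set_self _ _ _ _ (by rw [buildTree_length]; omega)]
        rw [ihv x.1, hchlapp, if_pos rfl]
        by_cases hc : 1 ≤ x.1 ∧ x.1 ≤ ps.length
        · rw [if_pos hc, if_pos (show 1 ≤ x.1 ∧ x.1 ≤ (ps ++ [x]).length by simp; omega)]
          rw [par_append ps x x.1 hc.1 hc.2]
          simp
        · rw [if_neg hc, if_neg (show ¬ (1 ≤ x.1 ∧ x.1 ≤ (ps ++ [x]).length) from fun hh => hc ⟨hh.1, hxle⟩)]
          simp
      · rw [getD_set_ne _ _ _ _ _ (fun hh => hvx hh.symm)]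
        rw [ihv v, hchlapp]
        rw [if_neg (show ¬ x.1 = v from fun hh => hvx hh.symm)]
        have hcond : (1 ≤ v ∧ v ≤ (ps ++ [x]).length) ↔ (1 ≤ v ∧ v ≤ ps.length) := by
          simp
          omega
        by_cases hc : 1 ≤ v ∧ v ≤ ps.length
        · rw [if_pos hc, if_pos (hcond.2 hc)]
          rw [par_append ps x v hc.1 hc.2]
          simp
        · rw [if_neg hc, if_neg (show ¬ (1 ≤ v ∧ v ≤ (ps ++ [x]).length) from fun hh => hc (hcond.1 hh))]
          simp

-- ----- the pure structural facts both sides need -----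

structure PFacts (ps : List (Nat × Nat)) : Prop where
  f1 : ∀ c, 1 ≤ c → c ≤ ps.length → par ps c < c
  f2 : ∀ c, 1 ≤ c → c ≤ ps.length → dep ps c = dep ps (par ps c) + 1
  f3 : ∀ c, 1 ≤ c → c ≤ ps.length → ∀ w, par ps c < w → w < c → dep ps (par ps c) < dep ps w

theorem pfacts_of_minv (ps : List (Nat × Nat)) (stack : List Nat) (cur : Nat)
    (h : MInv ps stack cur) : PFacts ps := by
  refine ⟨?_, ?_, ?_⟩
  · intro c h1 h2
    have := h.hpar1 (c - 1) (by omega)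
    unfold par
    omega
  · intro c h1 h2
    have := h.hpar2 (c - 1) (by omega)
    unfold dep par
    have hc0 : ¬ c = 0 := by omega
    simp only [hc0, if_false]
    exact this
  · intro c h1 h2 w hw1 hw2
    have := h.hM7 (c - 1) (by omega) w (by unfold par at hw1; exact hw1) (by omega)
    unfold par
    exact this

theorem child_ord (ps : List (Nat × Nat)) (F : PFacts ps) (u v cu cv : Nat)
    (huv : u < v) (hd : dep ps u = dep ps v)
    (hcu1 : 1 ≤ cu) (hcu2 : cu ≤ ps.length) (hcu3 : par ps cu = u)
    (hcv1 : 1 ≤ cv) (hcv2 : cv ≤ ps.length) (hcv3 : par ps cv = v) : cu < cv := by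
  have hu : u < cu := hcu3 ▸ F.f1 cu hcu1 hcu2
  have hv : v < cv := hcv3 ▸ F.f1 cv hcv1 hcv2
  rcases Nat.lt_trichotomy cu v with hlt | heq | hgt
  · omega
  · exfalso
    have h2 := F.f2 cu hcu1 hcu2
    rw [hcu3, heq] at h2
    omega
  · exfalso
    have h3 := F.f3 cu hcu1 hcu2 v (by rw [hcu3]; exact huv) hgt
    rw [hcu3] at h3
    omega

-- ----- A's first BFS finds the (depth, index)-maximum -----

theorem bestF_spec (ps : List (Nat × Nat)) :
    (bestF ps).2 ≤ ps.length ∧ (bestF ps).1 = dep ps (bestF ps).2 ∧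
    ∀ v, v ≤ ps.length → v ≠ (bestF ps).2 → kless ps v (bestF ps).2 := by
  induction ps using List.reverseRecOn with
  | nil =>
    refine ⟨by simp [bestF], by simp [bestF, dep], ?_⟩
    intro v hv hne
    simp at hv
    simp [bestF] at hne
    omega
  | append_singleton ps x ih =>
    obtain ⟨ih1, ih2, ih3⟩ := ih
    rw [bestF_append]
    have hnew := dep_append_new ps x
    by_cases hb : (bestF ps).1 ≤ x.2
    · rw [if_pos hb]
      refine ⟨by simp, by simp [hnew], ?_⟩
      intro v hv hne
      show kless (ps ++ [x]) v (ps.length + 1)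
      simp only [List.length_append, List.length_cons, List.length_nil] at hv
      have hvle : v ≤ ps.length := by omega
      unfold kless
      rw [hnew, dep_append ps x v hvle]
      by_cases hvk : v = (bestF ps).2
      · subst hvk
        rw [← ih2]
        rcases Nat.lt_or_ge (bestF ps).1 x.2 with hl | hg
        · left; exact hl
        · right; exact ⟨by omega, by omega⟩
      · have hkl := ih3 v hvle hvk
        unfold kless at hkl
        rcases hkl with hl | ⟨he, hlt⟩
        · left; omega
        · rcases Nat.lt_or_ge (dep ps v) x.2 with hl2 | hg2
          · left; exact hl2
          · right; exact ⟨by omega, by omega⟩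
    · rw [if_neg hb]
      refine ⟨by simp; omega, ?_, ?_⟩
      · rw [dep_append ps x _ ih1]; exact ih2
      · intro v hv hne
        simp only [List.length_append, List.length_cons, List.length_nil] at hv
        unfold kless
        rw [dep_append ps x _ ih1]
        by_cases hvn : v = ps.length + 1
        · subst hvn
          rw [hnew, ← ih2]
          left; omega
        · have hvle : v ≤ ps.length := by omega
          rw [dep_append ps x v hvle]
          have := ih3 v hvle hne
          unfold kless at this
          rw [← ih2] at this ⊢
          exact this

-- ----- BFS-1 invariant: queue sorted by (depth, index); only the farthest node matters -----

structure BInv (ps : List (Nat × Nat)) (N : Nat) (q : List Nat) (head : Nat) (dist : List Int)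
    (far : Nat) : Prop where
  hq0 : q.getD 0 0 = 0
  hqne : q ≠ []
  hlast : q.getLast? = some far
  hsort : q.Pairwise (kless ps)
  hbound : ∀ v ∈ q, v ≤ ps.length
  hdlen : dist.length = N
  hvis : ∀ v, v ≤ ps.length → ((dist.getD v (-1) ≠ -1) ↔ v ∈ q)
  hhead : head ≤ q.length
  hclos : ∀ c, 1 ≤ c → c ≤ ps.length → par ps c ∈ q.take head → c ∈ q
  hup : ∀ j, 0 < j → j < q.length →
          ∃ i, i < j ∧ i < head ∧ 1 ≤ q.getD j 0 ∧ par ps (q.getD j 0) = q.getD i 0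

theorem getD_append_left' {α : Type} (q ext : List α) (j : Nat) (d : α) (h : j < q.length) :
    (q ++ ext).getD j d = q.getD j d := by
  simp [List.getD, List.getElem?_append_left h]

theorem getD_append_right' {α : Type} (q ext : List α) (j : Nat) (d : α) (h : q.length ≤ j) :
    (q ++ ext).getD j d = ext.getD (j - q.length) d := by
  simp [List.getD, List.getElem?_append_right h]

-- the inner neighbour fold over a (sorted) list of unqueued children of u
theorem child_fold (ps : List (Nat × Nat)) (N : Nat) (F : PFacts ps) (hmN : ps.length < N)
    (u : Nat) (l : List Nat) :
    ∀ (q : List Nat) (dist : List Int) (far : Nat),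
    l.Pairwise (· < ·) →
    (∀ c ∈ l, 1 ≤ c ∧ c ≤ ps.length ∧ par ps c = u) →
    (∀ c ∈ l, ∀ y ∈ q, kless ps y c) →
    q ≠ [] →
    q.getLast? = some far →
    q.Pairwise (kless ps) →
    (∀ v ∈ q, v ≤ ps.length) →
    dist.length = N →
    (∀ v, v ≤ ps.length → ((dist.getD v (-1) ≠ -1) ↔ v ∈ q)) →
    (∀ x ∈ dist, -1 ≤ x) →
    u ∈ q →
    (∃ ext, (l.foldl (visitA u) (q, dist, far)).1 = q ++ ext ∧ ∀ c ∈ ext, c ∈ l) ∧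
    (l.foldl (visitA u) (q, dist, far)).1.getLast? = some (l.foldl (visitA u) (q, dist, far)).2.2 ∧
    (l.foldl (visitA u) (q, dist, far)).1.Pairwise (kless ps) ∧
    (∀ v ∈ (l.foldl (visitA u) (q, dist, far)).1, v ≤ ps.length) ∧
    (l.foldl (visitA u) (q, dist, far)).2.1.length = N ∧
    (∀ v, v ≤ ps.length →
      (((l.foldl (visitA u) (q, dist, far)).2.1.getD v (-1) ≠ -1) ↔ v ∈ (l.foldl (visitA u) (q, dist, far)).1)) ∧
    (∀ c ∈ l, c ∈ (l.foldl (visitA u) (q, dist, far)).1) := by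
  induction l with
  | nil =>
    intro q dist far _ _ _ hne hlast hsort hbound hdlen hvis hge hu
    exact ⟨⟨[], by simp, by simp⟩, hlast, hsort, hbound, hdlen, hvis, by simp⟩
  | cons c t ih =>
    intro q dist far hpw hlc hgt hne hlast hsort hbound hdlen hvis hge hu
    simp only [List.foldl_cons]
    have hcc := hlc c List.mem_cons_self
    have hclen : c < dist.length := by rw [hdlen]; omega
    by_cases hg2 : dist.getD c (-1) = -1
    · -- c gets appended
      have hdc : dist[c] = -1 := by
        have h2 := hg2
        rw [List.getD_eq_getElem dist (-1) hclen] at h2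
        exact h2
      have hv : visitA u (q, dist, far) c = (q ++ [c], dist.set c (dist.getD u (-1) + 1), c) := by
        simp [visitA, hclen, hdc]
      rw [hv]
      have hun : dist.getD u (-1) ≠ -1 := (hvis u (hbound u hu)).2 hu
      have hum1 : -1 ≤ dist.getD u (-1) := by
        by_cases hn : u < dist.length
        · rw [List.getD_eq_getElem dist (-1) hn]
          exact hge _ (List.getElem_mem hn)
        · rw [List.getD_eq_default dist (-1) (Nat.le_of_not_lt hn)]
      obtain ⟨C1, C2, C3, C4, C5, C6, C7⟩ := ih (q ++ [c]) (dist.set c (dist.getD u (-1) + 1)) c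
        hpw.of_cons
        (fun c' h => hlc c' (List.mem_cons_of_mem c h))
        (by
          intro c' hc' y hy
          rcases List.mem_append.1 hy with hyq | hyc
          · exact hgt c' (List.mem_cons_of_mem c hc') y hyq
          · have hyeq : y = c := by simpa using hyc
            have hc'2 := hlc c' (List.mem_cons_of_mem c hc')
            have hd1 : dep ps c = dep ps u + 1 := by
              have hf := F.f2 c hcc.1 hcc.2.1
              rwa [hcc.2.2] at hf
            have hd2 : dep ps c' = dep ps u + 1 := by
              have hf := F.f2 c' hc'2.1 hc'2.2.1
              rwa [hc'2.2.2] at hf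
            rw [hyeq]
            exact Or.inr ⟨by omega, (List.pairwise_cons.1 hpw).1 c' hc'⟩)
        (by simp)
        (by rw [List.getLast?_concat])
        (by
          refine List.pairwise_append.2 ⟨hsort, List.pairwise_singleton _ _, ?_⟩
          intro y hy z hz
          have hzc : z = c := by simpa using hz
          rw [hzc]
          exact hgt c List.mem_cons_self y hy)
        (by
          intro v hv'
          rcases List.mem_append.1 hv' with h | h
          · exact hbound v h
          · have : v = c := by simpa using h
            subst this
            exact hcc.2.1)
        (by rw [List.length_set]; exact hdlen)
        (by
          intro v hvm
          by_cases hvc : v = c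
          · subst hvc
            rw [getD_set_self _ _ _ _ hclen]
            constructor
            · intro _
              exact List.mem_append_right _ (by simp)
            · intro _
              omega
          · rw [getD_set_ne _ _ _ _ _ (fun hh => hvc hh.symm)]
            rw [hvis v hvm]
            constructor
            · intro h
              exact List.mem_append_left _ h
            · intro h
              rcases List.mem_append.1 h with h | h
              · exact h
              · exact absurd (by simpa using h) hvc)
        (by
          intro x hx
          rcases List.mem_or_eq_of_mem_set hx with h | h
          · exact hge x h
          · omega)
        (List.mem_append_left _ hu)
      refine ⟨?_, C2, C3, C4, C5, C6, ?_⟩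
      · obtain ⟨ext, he, hsub⟩ := C1
        refine ⟨c :: ext, by rw [he]; simp, ?_⟩
        intro c' hc'
        rcases List.mem_cons.1 hc' with rfl | h
        · exact List.mem_cons_self
        · exact List.mem_cons_of_mem c (hsub c' h)
      · intro c' hc'
        rcases List.mem_cons.1 hc' with rfl | h
        · obtain ⟨ext, he, _⟩ := C1
          rw [he]
          exact List.mem_append_left _ (List.mem_append_right _ (by simp))
        · exact C7 c' h
    · -- c already in the queue; state unchanged
      have hv : visitA u (q, dist, far) c = (q, dist, far) := by
        simp only [visitA,
          if_neg (show ¬ (c < dist.length ∧ dist.getD c (-1) = -1) from fun hh => hg2 hh.2)]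
      rw [hv]
      have hcinq : c ∈ q := (hvis c hcc.2.1).1 hg2
      obtain ⟨C1, C2, C3, C4, C5, C6, C7⟩ := ih q dist far hpw.of_cons
        (fun c' h => hlc c' (List.mem_cons_of_mem c h))
        (fun c' h y hy => hgt c' (List.mem_cons_of_mem c h) y hy)
        hne hlast hsort hbound hdlen hvis hge hu
      obtain ⟨ext, he, hsub⟩ := C1
      refine ⟨⟨ext, he, fun c' h => List.mem_cons_of_mem c (hsub c' h)⟩, C2, C3, C4, C5, C6, ?_⟩
      intro c' hc'
      rcases List.mem_cons.1 hc' with rfl | h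
      · rw [he]
        exact List.mem_append_left _ hcinq
      · exact C7 c' h

theorem hp_of_F (ps : List (Nat × Nat)) (F : PFacts ps) :
    ∀ k, k < ps.length → (ps.getD k (0, 0)).1 ≤ k := by
  intro k hk
  have hf := F.f1 (k + 1) (by omega) (by omega)
  unfold par at hf
  simp only [Nat.add_sub_cancel] at hf
  omega

-- one iteration of the first BFS's while loop preserves the invariant
theorem bfs_step (ps : List (Nat × Nat)) (N : Nat) (F : PFacts ps) (hmN : ps.length < N)
    (q : List Nat) (head : Nat) (dist : List Int) (far : Nat)
    (inv : BInv ps N q head dist far) (hlt : head < q.length) (hge : ∀ x ∈ dist, -1 ≤ x) :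
    BInv ps N
      (((buildTree N ps).getD (q.getD head 0) []).foldl (visitA (q.getD head 0)) (q, dist, far)).1
      (head + 1)
      (((buildTree N ps).getD (q.getD head 0) []).foldl (visitA (q.getD head 0)) (q, dist, far)).2.1
      (((buildTree N ps).getD (q.getD head 0) []).foldl (visitA (q.getD head 0)) (q, dist, far)).2.2 := by
  generalize hgen : q.getD head 0 = u
  have hu' : u = q[head] := by rw [← hgen]; exact List.getD_eq_getElem q 0 hlt
  have huq : u ∈ q := by rw [hu']; exact List.getElem_mem hlt
  have hum : u ≤ ps.length := inv.hbound u huq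
  have hadjv := adj_buildTree N ps (hp_of_F ps F) hmN u
  rw [hadjv, List.foldl_append]
  have hpar_skip : (if 1 ≤ u ∧ u ≤ ps.length then [par ps u] else []).foldl (visitA u) (q, dist, far)
      = (q, dist, far) := by
    by_cases hcond : 1 ≤ u ∧ u ≤ ps.length
    · rw [if_pos hcond]
      simp only [List.foldl_cons, List.foldl_nil]
      have hh0 : 0 < head := by
        by_contra hh
        have h0 : head = 0 := by omega
        have hq00 : q[head] = 0 := by
          rw [← List.getD_eq_getElem q 0 hlt, h0]
          exact inv.hq0
        rw [hq00] at hu'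
        omega
      obtain ⟨i, hij, hih, h1, hpar⟩ := inv.hup head hh0 hlt
      rw [hgen] at hpar
      have hilen : i < q.length := by omega
      have hpq : par ps u ∈ q := by
        rw [hpar, List.getD_eq_getElem q 0 hilen]
        exact List.getElem_mem hilen
      have hnd : dist.getD (par ps u) (-1) ≠ -1 := (inv.hvis _ (inv.hbound _ hpq)).2 hpq
      exact (show visitA u (q, dist, far) (par ps u) = (q, dist, far) by
        simp only [visitA,
          if_neg (show ¬ ((par ps u) < dist.length ∧ dist.getD (par ps u) (-1) = -1) from
            fun hh => hnd hh.2)])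
    · rw [if_neg hcond]
      rfl
  rw [hpar_skip]
  -- every pending child of u is kless-above everything in the queue
  have hgt_main : ∀ c ∈ chl ps u, ∀ y ∈ q, kless ps y c := by
    intro c hcm y hy
    obtain ⟨hc1, hc2, hc3⟩ := (mem_chl ps u c).1 hcm
    have hdc : dep ps c = dep ps u + 1 := by
      have := F.f2 c hc1 hc2
      rwa [hc3] at this
    obtain ⟨iy, hiy, rfl⟩ := List.mem_iff_getElem.1 hy
    by_cases hcase : iy ≤ head
    · by_cases hieq : iy = head
      · left
        have hyq : q[iy] = u := by
          subst hieq
          exact hu'.symm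
        rw [hyq]
        omega
      · have hiy' : iy < head := by omega
        have hkyu : kless ps q[iy] q[head] :=
          List.pairwise_iff_getElem.1 inv.hsort iy head hiy hlt hiy'
        rw [← hu'] at hkyu
        unfold kless at hkyu ⊢
        rcases hkyu with h | ⟨h, _⟩
        · left; omega
        · left; omega
    · have hiy0 : 0 < iy := by omega
      obtain ⟨i, hij, hih, h1, hpar⟩ := inv.hup iy hiy0 hiy
      have hilen : i < q.length := by omega
      have hyD : q.getD iy 0 = q[iy] := List.getD_eq_getElem q 0 hiy
      have hiD : q.getD i 0 = q[i] := List.getD_eq_getElem q 0 hilen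
      rw [hyD, hiD] at hpar
      rw [hyD] at h1
      have hym : q[iy] ≤ ps.length := inv.hbound _ (List.getElem_mem hiy)
      have him : q[i] ≤ ps.length := inv.hbound _ (List.getElem_mem hilen)
      have hdy : dep ps q[iy] = dep ps q[i] + 1 := by
        have := F.f2 q[iy] h1 hym
        rwa [hpar] at this
      have hkpu : kless ps q[i] u := by
        have hpij := List.pairwise_iff_getElem.1 inv.hsort i head hilen hlt hih
        rw [← hu'] at hpij
        exact hpij
      unfold kless at hkpu ⊢
      rcases hkpu with h | ⟨heq, hlt'⟩
      · left; omega
      · right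
        refine ⟨by omega, ?_⟩
        exact child_ord ps F q[i] u q[iy] c hlt' heq h1 hym hpar hc1 hc2 hc3
  have key := child_fold ps N F hmN u (chl ps u) q dist far
    (chl_sorted ps u)
    (fun c h => (mem_chl ps u c).1 h)
    hgt_main
    inv.hqne inv.hlast inv.hsort inv.hbound inv.hdlen inv.hvis hge huq
  obtain ⟨⟨ext, hext, hsub⟩, C2, C3, C4, C5, C6, C7⟩ := key
  refine ⟨?_, ?_, C2, C3, C4, C5, C6, ?_, ?_, ?_⟩
  · rw [hext, getD_append_left' _ _ _ _ (by omega)]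
    exact inv.hq0
  · rw [hext]
    intro hcontra
    rcases List.append_eq_nil_iff.1 hcontra with ⟨h, _⟩
    exact inv.hqne h
  · rw [hext]
    simp only [List.length_append]
    omega
  · intro c h1 h2 hmem
    rw [hext, List.take_append_of_le_length (by omega)] at hmem
    rw [List.take_add_one] at hmem
    have hsome : q[head]?.toList = [q[head]] := by
      rw [List.getElem?_eq_getElem hlt]
      rfl
    rw [hsome] at hmem
    rcases List.mem_append.1 hmem with h | h
    · have := inv.hclos c h1 h2 h
      rw [hext]
      exact List.mem_append_left _ this
    · have hpc : par ps c = u := by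
        have hph : par ps c = q[head] := by simpa using h
        rw [hph, ← hu']
      exact C7 c ((mem_chl ps u c).2 ⟨h1, h2, hpc⟩)
  · intro j hj0 hjlen
    rw [hext] at hjlen
    simp only [List.length_append] at hjlen
    by_cases hjq : j < q.length
    · obtain ⟨i, hij, hih, h1, hpar⟩ := inv.hup j hj0 hjq
      refine ⟨i, hij, by omega, ?_, ?_⟩
      · rw [hext, getD_append_left' _ _ _ _ hjq]
        exact h1
      · rw [hext, getD_append_left' _ _ _ _ hjq, getD_append_left' _ _ _ _ (by omega)]
        exact hpar
    · have hjq' : q.length ≤ j := by omega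
      have he : (q ++ ext).getD j 0 = ext.getD (j - q.length) 0 := getD_append_right' _ _ _ _ hjq'
      have hexlen : j - q.length < ext.length := by omega
      have hmemext : ext.getD (j - q.length) 0 ∈ ext := by
        rw [List.getD_eq_getElem ext 0 hexlen]
        exact List.getElem_mem hexlen
      have hinchl := hsub _ hmemext
      obtain ⟨he1, he2, he3⟩ := (mem_chl ps u _).1 hinchl
      refine ⟨head, by omega, by omega, ?_, ?_⟩
      · rw [hext, he]
        exact he1
      · rw [hext, he, getD_append_left' _ _ _ _ hlt, hgen]
        exact he3

-- at loop exit the tracked farthest node is the (depth, index)-maximum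
theorem bfs_end (ps : List (Nat × Nat)) (N : Nat) (F : PFacts ps)
    (q : List Nat) (head : Nat) (dist : List Int) (far : Nat)
    (inv : BInv ps N q head dist far) (hend : q.length ≤ head) : far = (bestF ps).2 := by
  obtain ⟨hB1, hB2, hB3⟩ := bestF_spec ps
  have hcomp : ∀ v, v ≤ ps.length → v ∈ q := by
    intro v
    induction v using Nat.strong_induction_on with
    | _ v ihv =>
      intro hvm
      by_cases hv0 : v = 0
      · subst hv0
        have hlen0 : 0 < q.length := List.length_pos_of_ne_nil inv.hqne
        have : q.getD 0 0 = q[0] := List.getD_eq_getElem q 0 hlen0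
        rw [inv.hq0] at this
        rw [this]
        exact List.getElem_mem hlen0
      · have h1 : 1 ≤ v := by omega
        have hplt := F.f1 v h1 hvm
        have hpin : par ps v ∈ q := ihv (par ps v) hplt (by omega)
        exact inv.hclos v h1 hvm (by rw [List.take_of_length_le hend]; exact hpin)
  have hfarq : far ∈ q := List.mem_of_getLast? inv.hlast
  have hfarm := inv.hbound far hfarq
  by_cases hfk : far = (bestF ps).2
  · exact hfk
  · exfalso
    have hkf : kless ps far (bestF ps).2 := hB3 far hfarm hfk
    have hKin : (bestF ps).2 ∈ q := hcomp _ hB1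
    have hlen0 : 0 < q.length := List.length_pos_of_ne_nil inv.hqne
    have hfare : q[q.length - 1]'(by omega) = far := by
      have := inv.hlast
      rw [List.getLast?_eq_getElem?] at this
      rw [List.getElem?_eq_getElem (by omega : q.length - 1 < q.length)] at this
      simpa using this
    obtain ⟨iK, hiK, hKe⟩ := List.mem_iff_getElem.1 hKin
    by_cases hik : iK = q.length - 1
    · apply hfk
      subst hik
      rw [← hfare]
      exact hKe
    · have hkl : kless ps q[iK] (q[q.length - 1]'(by omega)) :=
        List.pairwise_iff_getElem.1 inv.hsort iK (q.length - 1) hiK (by omega) (by omega)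
      have h2 : kless ps (bestF ps).2 far := by
        rw [← hKe, ← hfare]
        exact hkl
      unfold kless at h2 hkf
      omega

-- the first while loop returns the (depth, index)-maximum node
theorem bfsLoopA_far (ps : List (Nat × Nat)) (N : Nat) (F : PFacts ps) (hmN : ps.length < N) :
    ∀ (μ : Nat) (q : List Nat) (head : Nat) (dist : List Int) (far : Nat),
      (∀ x ∈ dist, -1 ≤ x) →
      negCount dist + q.length - head ≤ μ → BInv ps N q head dist far →
      (bfsLoopA (buildTree N ps) μ q head dist far).1 = (bestF ps).2 := by
  intro μ
  induction μ with
  | zero =>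
    intro q head dist far hA hμ inv
    show far = _
    exact bfs_end ps N F q head dist far inv (by omega)
  | succ μ ihμ =>
    intro q head dist far hA hμ inv
    show (if head < q.length then _ else (far, dist)).1 = _
    by_cases hlt : head < q.length
    · rw [if_pos hlt]
      have hb := (visitA_fold_bound (q.getD head 0) ((buildTree N ps).getD (q.getD head 0) []) q dist far hA).2
      exact ihμ _ _ _ _
        (visitA_fold_bound (q.getD head 0) ((buildTree N ps).getD (q.getD head 0) []) q dist far hA).1
        (by omega) (bfs_step ps N F hmN q head dist far inv hlt hA)
    · rw [if_neg hlt]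
      exact bfs_end ps N F q head dist far inv (by omega)

theorem getD_replicate_self {α : Type} (N v : Nat) (a : α) :
    (List.replicate N a).getD v a = a := by
  simp [List.getD, List.getElem?_replicate]
  split <;> rfl

theorem binv_init (ps : List (Nat × Nat)) (N : Nat) (hmN : ps.length < N) :
    BInv ps N [0] 0 ((List.replicate N (-1 : Int)).set 0 0) 0 := by
  have hlen : (List.replicate N (-1 : Int)).length = N := by simp
  refine ⟨rfl, by simp, rfl, List.pairwise_singleton _ _, ?_, by simp, ?_, by simp, ?_, ?_⟩
  · intro v hv
    simp at hv
    omega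
  · intro v hvm
    by_cases hv0 : v = 0
    · subst hv0
      rw [getD_set_self _ _ _ _ (by rw [hlen]; omega)]
      simp
    · rw [getD_set_ne _ _ _ _ _ (fun hh => hv0 hh.symm), getD_replicate_self]
      simp [hv0]
  · intro c _ _ h
    simp at h
  · intro j h1 h2
    simp at h2
    omega

theorem bfsA_far (ps : List (Nat × Nat)) (N : Nat) (F : PFacts ps) (hmN : ps.length < N) :
    (bfsA (buildTree N ps) N 0).1 = (bestF ps).2 := by
  unfold bfsA
  refine bfsLoopA_far ps N F hmN (N + 1) _ _ _ _ ?_ ?_ (binv_init ps N hmN)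
  · intro x hx
    rcases List.mem_or_eq_of_mem_set hx with h | h
    · have := List.eq_of_mem_replicate h
      omega
    · omega
  · have h2 : negCount ((List.replicate N (-1 : Int)).set 0 0)
        ≤ ((List.replicate N (-1 : Int)).set 0 0).length := List.countP_le_length
    simp at h2 ⊢
    omega

theorem a_eq (n : Int) (log : String) (T : List (List Nat))
    (hT : (log.toList.foldl stepA (List.replicate n.toNat [], ([] : List Nat), 0, 1)).1 = T) :
    analyze_tree n log
      = (PySem.Int.mod ((PySem.List.max? (bfsA T n.toNat (bfsA T n.toNat 0).1).2 (fun x => x)).getD 0) 2 + 1,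
         PySem.Int.floordiv ((PySem.List.max? (bfsA T n.toNat (bfsA T n.toNat 0).1).2 (fun x => x)).getD 0 + 1) 2,
         (PySem.List.max? (bfsA T n.toNat (bfsA T n.toNat 0).1).2 (fun x => x)).getD 0) := by
  subst hT
  rfl

-- ----- abstract parent/depth arrays and B's parse -----

def parList (n : Nat) (ps : List (Nat × Nat)) : List Nat :=
  (List.range n).map (fun v => if v = 0 then 0 else par ps v)

def depList (n : Nat) (ps : List (Nat × Nat)) : List Nat :=
  (List.range n).map (fun v => dep ps v)

theorem getD_map_range {α : Type} (n v : Nat) (f : Nat → α) (d : α) :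
    ((List.range n).map f).getD v d = if v < n then f v else d := by
  by_cases h : v < n
  · rw [List.getD_eq_getElem _ _ (by simpa using h)]
    simp [h]
  · rw [List.getD_eq_default _ _ (by simpa using Nat.le_of_not_lt h)]
    simp [h]

theorem parList_getD (n : Nat) (ps : List (Nat × Nat)) (v : Nat) (hv : v < n) :
    (parList n ps).getD v 0 = if v = 0 then 0 else par ps v := by
  rw [parList, getD_map_range, if_pos hv]

theorem depList_getD (n : Nat) (ps : List (Nat × Nat)) (v : Nat) (hv : v < n) :
    (depList n ps).getD v 0 = dep ps v := by
  rw [depList, getD_map_range, if_pos hv]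

theorem parList_nil (n : Nat) : parList n [] = List.replicate n 0 := by
  unfold parList
  rw [List.eq_replicate_iff]
  refine ⟨by simp, ?_⟩
  intro b hb
  rcases List.mem_map.1 hb with ⟨v, _, rfl⟩
  by_cases h : v = 0
  · simp [h]
  · simp [h, par, List.getD]

theorem depList_nil (n : Nat) : depList n [] = List.replicate n 0 := by
  unfold depList
  rw [List.eq_replicate_iff]
  refine ⟨by simp, ?_⟩
  intro b hb
  rcases List.mem_map.1 hb with ⟨v, _, rfl⟩
  by_cases h : v = 0
  · simp [h, dep]
  · simp [h, dep, List.getD]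

theorem parList_append (n : Nat) (ps : List (Nat × Nat)) (x : Nat × Nat)
    (h : ps.length + 1 < n) :
    parList n (ps ++ [x]) = (parList n ps).set (ps.length + 1) x.1 := by
  apply List.ext_getElem
  · simp [parList]
  · intro v hv1 hv2
    have hvn : v < n := by simpa [parList] using hv1
    have e1 : (parList n (ps ++ [x]))[v] = if v = 0 then 0 else par (ps ++ [x]) v := by
      simp [parList, List.getElem_map]
    rw [e1]
    have e2 : ((parList n ps).set (ps.length + 1) x.1)[v]
        = if v = ps.length + 1 then x.1 else (if v = 0 then 0 else par ps v) := by
      by_cases hveq : v = ps.length + 1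
      · subst hveq
        rw [List.getElem_set_self (by simpa [parList] using h)]
        simp
      · rw [List.getElem_set_ne (fun hh => hveq hh.symm)]
        simp [parList, hveq]
    rw [e2]
    by_cases hveq : v = ps.length + 1
    · subst hveq
      rw [if_pos rfl, if_neg (by omega), par_append_new]
    · rw [if_neg hveq]
      by_cases hv0 : v = 0
      · simp [hv0]
      · rw [if_neg hv0, if_neg hv0]
        by_cases hvle : v ≤ ps.length
        · exact par_append ps x v (by omega) hvle
        · rw [par_big _ _ (by simp; omega), par_big _ _ (by omega)]

theorem depList_append (n : Nat) (ps : List (Nat × Nat)) (x : Nat × Nat)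
    (h : ps.length + 1 < n) :
    depList n (ps ++ [x]) = (depList n ps).set (ps.length + 1) x.2 := by
  apply List.ext_getElem
  · simp [depList]
  · intro v hv1 hv2
    have hvn : v < n := by simpa [depList] using hv1
    have e1 : (depList n (ps ++ [x]))[v] = dep (ps ++ [x]) v := by
      simp [depList]
    rw [e1]
    have e2 : ((depList n ps).set (ps.length + 1) x.2)[v]
        = if v = ps.length + 1 then x.2 else dep ps v := by
      by_cases hveq : v = ps.length + 1
      · subst hveq
        rw [List.getElem_set_self (by simpa [depList] using h)]
        simp
      · rw [List.getElem_set_ne (fun hh => hveq hh.symm)]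
        simp [depList, hveq]
    rw [e2]
    by_cases hveq : v = ps.length + 1
    · subst hveq
      rw [if_pos rfl, dep_append_new]
    · rw [if_neg hveq]
      by_cases hvle : v ≤ ps.length
      · exact dep_append ps x v hvle
      · rw [dep_big _ _ (by simp; omega), dep_big _ _ (by omega)]

-- B's parse, against the model
theorem parseP_model (l : List Char) (n : Nat) (ps : List (Nat × Nat)) (stack : List Nat) (cur : Nat)
    (hinv : MInv ps stack cur)
    (hfit : ps.length + l.countP (fun c => c == '0') < n) :
    l.foldl stepP (parList n ps, depList n ps, stack, cur, ps.length + 1)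
      = (parList n (l.foldl mstep (ps, stack, cur)).1,
         depList n (l.foldl mstep (ps, stack, cur)).1,
         (l.foldl mstep (ps, stack, cur)).2.1,
         (l.foldl mstep (ps, stack, cur)).2.2,
         (l.foldl mstep (ps, stack, cur)).1.length + 1) := by
  induction l generalizing ps stack cur with
  | nil => rfl
  | cons c t ih =>
    simp only [List.foldl_cons]
    by_cases h0 : c = '0'
    · have hcnt : ps.length + 1 < n := by
        simp only [List.countP_cons, h0] at hfit
        simp at hfit
        omega
      have hcurn : cur < n := by
        have := hinv.hcur
        omega
      have hdval : (depList n ps).getD cur 0 + 1 = stack.length + 1 := by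
        rw [depList_getD n ps cur hcurn, hinv.hdepcur]
      have hB : stepP (parList n ps, depList n ps, stack, cur, ps.length + 1) c
          = (parList n (ps ++ [(cur, stack.length + 1)]),
             depList n (ps ++ [(cur, stack.length + 1)]),
             cur :: stack, ps.length + 1, ps.length + 1 + 1) := by
        rw [parList_append n ps (cur, stack.length + 1) hcnt,
            depList_append n ps (cur, stack.length + 1) hcnt]
        simp only [stepP, if_pos h0]
        rw [hdval]
      have hM : mstep (ps, stack, cur) c = (ps ++ [(cur, stack.length + 1)], cur :: stack, ps.length + 1) := by
        simp [mstep, h0]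
      rw [hB, hM]
      have hinv' := minv_step ps stack cur c hinv
      rw [hM] at hinv'
      have hfit' : (ps ++ [(cur, stack.length + 1)]).length + t.countP (fun c => c == '0') < n := by
        simp only [List.countP_cons, h0] at hfit
        simp at hfit ⊢
        omega
      have := ih (ps ++ [(cur, stack.length + 1)]) (cur :: stack) (ps.length + 1) hinv' hfit'
      have hlen1 : (ps ++ [(cur, stack.length + 1)]).length = ps.length + 1 := by simp
      rw [hlen1] at this
      exact this
    · by_cases h1 : c = '1'
      · have hB : stepP (parList n ps, depList n ps, stack, cur, ps.length + 1) c
            = (parList n ps, depList n ps, stack.tail, stack.headD 0, ps.length + 1) := by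
          simp [stepP, h0, h1]
        have hM : mstep (ps, stack, cur) c = (ps, stack.tail, stack.headD 0) := by
          simp [mstep, h0, h1]
        rw [hB, hM]
        have hinv' := minv_step ps stack cur c hinv
        rw [hM] at hinv'
        have hfit' : ps.length + t.countP (fun c => c == '0') < n := by
          simp only [List.countP_cons, h0] at hfit
          simp at hfit
          omega
        exact ih ps stack.tail (stack.headD 0) hinv' hfit'
      · have hB : stepP (parList n ps, depList n ps, stack, cur, ps.length + 1) c
            = (parList n ps, depList n ps, stack, cur, ps.length + 1) := by
          simp [stepP, h0, h1]
        have hM : mstep (ps, stack, cur) c = (ps, stack, cur) := by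
          simp [mstep, h0, h1]
        rw [hB, hM]
        have hinv' := minv_step ps stack cur c hinv
        rw [hM] at hinv'
        have hfit' : ps.length + t.countP (fun c => c == '0') < n := by
          simp only [List.countP_cons, h0] at hfit
          simp at hfit
          omega
        exact ih ps stack cur hinv' hfit'

-- B's deepest-node scan equals the model's bestF
theorem deepScan_prefix (n : Nat) (ps : List (Nat × Nat)) (k : Nat) (hk : k ≤ ps.length)
    (hn : ps.length < n) :
    (List.range (k + 1)).foldl
        (fun b v => if b.1 ≤ (depList n ps).getD v 0 then ((depList n ps).getD v 0, v) else b) (0, 0)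
      = bestF (ps.take k) := by
  induction k with
  | zero =>
    have h0 : (depList n ps).getD 0 0 = 0 := by
      rw [depList_getD n ps 0 (by omega)]
      simp [dep]
    rw [show (0 : Nat) + 1 = 1 from rfl, List.range_one]
    simp only [List.foldl_cons, List.foldl_nil]
    rw [h0]
    simp [bestF]
  | succ k ih =>
    have hk' : k ≤ ps.length := by omega
    rw [List.range_succ, List.foldl_append, ih hk']
    simp only [List.foldl_cons, List.foldl_nil]
    have htake : ps.take (k + 1) = ps.take k ++ [ps[k]'(by omega)] := by
      rw [List.take_add_one, List.getElem?_eq_getElem (by omega : k < ps.length)]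
      rfl
    rw [htake, bestF_append]
    have hlen : (ps.take k).length = k := by
      rw [List.length_take]
      omega
    have hdval : (depList n ps).getD (k + 1) 0 = (ps[k]'(by omega)).2 := by
      rw [depList_getD n ps (k + 1) (by omega)]
      unfold dep
      have : ¬ k + 1 = 0 := by omega
      simp [this, List.getD, List.getElem?_eq_getElem (by omega : k < ps.length)]
    rw [hdval, hlen]

theorem deepScan_eq_bestF (n : Nat) (ps : List (Nat × Nat)) (hn : ps.length < n) :
    deepScan (depList n ps) (ps.length + 1) = bestF ps := by
  unfold deepScan
  have := deepScan_prefix n ps ps.length (Nat.le_refl _) hn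
  rw [List.take_of_length_le (Nat.le_refl _)] at this
  exact this

-- ----- the root path of K (B's `while True` climb) -----

def chainL (par : List Nat) (a : Nat) : Nat → List Nat
  | 0 => []
  | f + 1 => a :: (if a = 0 then [] else chainL par (par.getD a 0) f)

theorem markPath_getD (par : List Nat) :
    ∀ (f : Nat) (onp : List Bool) (a v : Nat),
    a < onp.length →
    (∀ b, 1 ≤ b → b < onp.length → par.getD b 0 < b) →
    ((markPath par onp a f).getD v false = (onp.getD v false || decide (v ∈ chainL par a f))) := by
  intro f
  induction f with
  | zero =>
    intro onp a v _ _
    simp [markPath, chainL]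
  | succ f ih =>
    intro onp a v ha hdec
    show (if a = 0 then onp.set a true else markPath par (onp.set a true) (par.getD a 0) f).getD v false = _
    by_cases h0 : a = 0
    · subst h0
      rw [if_pos rfl]
      show (onp.set 0 true).getD v false = _
      have hch : chainL par 0 (f + 1) = [0] := by simp [chainL]
      rw [hch]
      by_cases hv : v = 0
      · subst hv
        rw [getD_set_self _ _ _ _ ha]
        simp
      · rw [getD_set_ne _ _ _ _ _ (fun hh => hv hh.symm)]
        simp [hv]
    · rw [if_neg h0]
      have hpa : par.getD a 0 < a := hdec a (by omega) ha
      have hlen : (onp.set a true).length = onp.length := by simp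
      rw [ih (onp.set a true) (par.getD a 0) v (by omega) (by rw [hlen]; exact hdec)]
      have hch : chainL par a (f + 1) = a :: chainL par (par.getD a 0) f := by
        simp [chainL, h0]
      rw [hch]
      by_cases hv : v = a
      · subst hv
        rw [getD_set_self _ _ _ _ ha]
        simp
      · rw [getD_set_ne _ _ _ _ _ (fun hh => hv hh.symm)]
        simp [hv]

theorem chainL_self (par : List Nat) (a f : Nat) : a ∈ chainL par a (f + 1) := by
  rw [chainL]
  exact List.mem_cons_self

theorem chainL_zero_mem (par : List Nat) :
    ∀ (a f : Nat), a < f → (∀ b, 1 ≤ b → b ≤ a → par.getD b 0 < b) →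
    0 ∈ chainL par a f := by
  intro a
  induction a using Nat.strong_induction_on with
  | _ a iha =>
    intro f hf hdec
    match f with
    | 0 => omega
    | f + 1 =>
      rw [chainL]
      by_cases h0 : a = 0
      · subst h0
        exact List.mem_cons_self
      · rw [if_neg h0]
        have hpa : par.getD a 0 < a := hdec a (by omega) (Nat.le_refl _)
        exact List.mem_cons_of_mem a
          (iha (par.getD a 0) hpa f (by omega) (fun b h1 h2 => hdec b h1 (by omega)))

theorem chainL_par_mem (par : List Nat) :
    ∀ (a f v : Nat), a < f → (∀ b, 1 ≤ b → b ≤ a → par.getD b 0 < b) →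
    v ∈ chainL par a f → 1 ≤ v → par.getD v 0 ∈ chainL par a f := by
  intro a
  induction a using Nat.strong_induction_on with
  | _ a iha =>
    intro f v hf hdec hv h1
    match f with
    | 0 => simp [chainL] at hv
    | f + 1 =>
      rw [chainL] at hv ⊢
      have hpa : a = 0 ∨ par.getD a 0 < a := by
        by_cases h0 : a = 0
        · left; exact h0
        · right; exact hdec a (by omega) (Nat.le_refl _)
      rcases List.mem_cons.1 hv with rfl | hv'
      · have h0 : ¬ v = 0 := by omega
        rw [if_neg h0]
        refine List.mem_cons_of_mem v ?_
        rcases hpa with h | h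
        · omega
        · match f, Nat.lt_of_lt_of_le h (by omega : v ≤ f) with
          | f' + 1, _ => exact chainL_self par (par.getD v 0) f'
      · have h0 : ¬ a = 0 := by
          intro hh
          subst hh
          simp at hv'
        rw [if_neg h0] at hv'
        rw [if_neg h0]
        rcases hpa with h | h
        · omega
        · exact List.mem_cons_of_mem a
            (iha (par.getD a 0) h f v (by omega) (fun b hb1 hb2 => hdec b hb1 (by omega)) hv' h1)

theorem chainL_succ_mem (par : List Nat) :
    ∀ (a f v : Nat), a < f → (∀ b, 1 ≤ b → b ≤ a → par.getD b 0 < b) →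
    v ∈ chainL par a f → v ≠ a →
    ∃ c ∈ chainL par a f, 1 ≤ c ∧ c ≤ a ∧ par.getD c 0 = v := by
  intro a
  induction a using Nat.strong_induction_on with
  | _ a iha =>
    intro f v hf hdec hv hva
    match f with
    | 0 => simp [chainL] at hv
    | f + 1 =>
      rw [chainL] at hv
      rcases List.mem_cons.1 hv with rfl | hv'
      · omega
      · have h0 : ¬ a = 0 := by
          intro hh
          subst hh
          simp at hv'
        rw [if_neg h0] at hv'
        have hpa : par.getD a 0 < a := hdec a (by omega) (Nat.le_refl _)
        by_cases hvp : v = par.getD a 0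
        · refine ⟨a, ?_, by omega, Nat.le_refl _, hvp.symm⟩
          rw [chainL]
          exact List.mem_cons_self
        · obtain ⟨c, hc1, hc2, hc3, hc4⟩ :=
            iha (par.getD a 0) hpa f v (by omega) (fun b hb1 hb2 => hdec b hb1 (by omega)) hv' hvp
          refine ⟨c, ?_, hc2, by omega, hc4⟩
          rw [chainL, if_neg h0]
          exact List.mem_cons_of_mem a hc1

-- depth strictly decreases down the chain
theorem chainL_dep (ps : List (Nat × Nat)) (F : PFacts ps) (pl : List Nat)
    (hpl : ∀ b, 1 ≤ b → b ≤ ps.length → pl.getD b 0 = par ps b) :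
    ∀ (a f v : Nat), a ≤ ps.length → v ∈ chainL pl a f →
    (dep ps v ≤ dep ps a ∧ (v ≠ a → dep ps v < dep ps a) ∧ v ≤ ps.length) := by
  intro a
  induction a using Nat.strong_induction_on with
  | _ a iha =>
    intro f v ham hv
    match f with
    | 0 => simp [chainL] at hv
    | f + 1 =>
      rw [chainL] at hv
      rcases List.mem_cons.1 hv with rfl | hv'
      · exact ⟨Nat.le_refl _, fun h => absurd rfl h, ham⟩
      · have h0 : ¬ a = 0 := by
          intro hh
          subst hh
          simp at hv'
        rw [if_neg h0] at hv'
        rw [hpl a (by omega) ham] at hv'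
        have hpa : par ps a < a := F.f1 a (by omega) ham
        have hda : dep ps a = dep ps (par ps a) + 1 := F.f2 a (by omega) ham
        obtain ⟨ih1, _, ih3⟩ := iha (par ps a) hpa f v (by omega) hv'
        exact ⟨by omega, fun _ => by omega, ih3⟩

theorem chainL_dep_inj (ps : List (Nat × Nat)) (F : PFacts ps) (pl : List Nat)
    (hpl : ∀ b, 1 ≤ b → b ≤ ps.length → pl.getD b 0 = par ps b) :
    ∀ (a f v w : Nat), a ≤ ps.length → v ∈ chainL pl a f → w ∈ chainL pl a f →
    dep ps v = dep ps w → v = w := by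
  intro a
  induction a using Nat.strong_induction_on with
  | _ a iha =>
    intro f v w ham hv hw hd
    match f with
    | 0 => simp [chainL] at hv
    | f + 1 =>
      rw [chainL] at hv hw
      rcases List.mem_cons.1 hv with hva | hv' <;> rcases List.mem_cons.1 hw with hwa | hw'
      · rw [hva, hwa]
      · exfalso
        have h0 : ¬ a = 0 := by
          intro hh
          subst hh
          simp at hw'
        rw [if_neg h0, hpl a (by omega) ham] at hw'
        have hq := (chainL_dep ps F pl hpl (par ps a) f w
          (by have := F.f1 a (by omega) ham; omega) hw').1
        have hda : dep ps a = dep ps (par ps a) + 1 := F.f2 a (by omega) ham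
        rw [hva] at hd
        omega
      · exfalso
        have h0 : ¬ a = 0 := by
          intro hh
          subst hh
          simp at hv'
        rw [if_neg h0, hpl a (by omega) ham] at hv'
        have hq := (chainL_dep ps F pl hpl (par ps a) f v
          (by have := F.f1 a (by omega) ham; omega) hv').1
        have hda : dep ps a = dep ps (par ps a) + 1 := F.f2 a (by omega) ham
        rw [hwa] at hd
        omega
      · have h0 : ¬ a = 0 := by
          intro hh
          subst hh
          simp at hv'
        rw [if_neg h0, hpl a (by omega) ham] at hv' hw'
        exact iha (par ps a) (F.f1 a (by omega) ham) f v w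
          (by have := F.f1 a (by omega) ham; omega) hv' hw' hd

-- ----- the lca-depth recursion and the distance-to-K function -----

def lrec (pl dl : List Nat) (onp : List Bool) : Nat → Nat → Nat
  | 0, _ => 0
  | f + 1, v => if onp.getD v false then dl.getD v 0 else lrec pl dl onp f (pl.getD v 0)

-- the abstract lca-depth of v (fuel v+1 always suffices on the tree)
def lfin (pl dl : List Nat) (onp : List Bool) (v : Nat) : Nat := lrec pl dl onp (v + 1) v

theorem lrec_fuel (pl dl : List Nat) (onp : List Bool) (M : Nat)
    (hdec : ∀ b, 1 ≤ b → b ≤ M → pl.getD b 0 < b) (h0 : onp.getD 0 false = true) :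
    ∀ (v : Nat), v ≤ M → ∀ f, v < f → lrec pl dl onp f v = lfin pl dl onp v := by
  intro v
  induction v using Nat.strong_induction_on with
  | _ v ihv =>
    intro hvM f hf
    match f with
    | 0 => omega
    | f + 1 =>
      show (if onp.getD v false then dl.getD v 0 else lrec pl dl onp f (pl.getD v 0)) = _
      by_cases hon : onp.getD v false
      · rw [if_pos hon]
        unfold lfin
        show _ = (if onp.getD v false then dl.getD v 0 else lrec pl dl onp v (pl.getD v 0))
        rw [if_pos hon]
      · have hv1 : 1 ≤ v := by
          by_contra hh
          have : v = 0 := by omega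
          subst this
          exact hon h0
        rw [if_neg hon]
        have hpv : pl.getD v 0 < v := hdec v hv1 hvM
        unfold lfin
        show _ = (if onp.getD v false then dl.getD v 0 else lrec pl dl onp v (pl.getD v 0))
        rw [if_neg hon]
        rw [ihv (pl.getD v 0) hpv (by omega) f (by omega),
            ihv (pl.getD v 0) hpv (by omega) v (by omega)]

theorem lfin_unfold (pl dl : List Nat) (onp : List Bool) (M : Nat)
    (hdec : ∀ b, 1 ≤ b → b ≤ M → pl.getD b 0 < b) (h0 : onp.getD 0 false = true)
    (v : Nat) (hv : v ≤ M) :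
    lfin pl dl onp v = if onp.getD v false then dl.getD v 0 else lfin pl dl onp (pl.getD v 0) := by
  by_cases hon : onp.getD v false
  · unfold lfin
    show (if onp.getD v false then dl.getD v 0 else lrec pl dl onp v (pl.getD v 0)) = _
    rw [if_pos hon, if_pos hon]
  · have hv1 : 1 ≤ v := by
      by_contra hh
      have : v = 0 := by omega
      subst this
      exact hon h0
    have hpv : pl.getD v 0 < v := hdec v hv1 hv
    unfold lfin
    show (if onp.getD v false then dl.getD v 0 else lrec pl dl onp v (pl.getD v 0)) = _
    rw [if_neg hon, if_neg hon]
    exact lrec_fuel pl dl onp M hdec h0 (pl.getD v 0) (by omega) v (by omega)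

-- ----- the tree's edge relation -----

def Edg (ps : List (Nat × Nat)) (u v : Nat) : Prop :=
  (1 ≤ u ∧ u ≤ ps.length ∧ par ps u = v) ∨ (1 ≤ v ∧ v ≤ ps.length ∧ par ps v = u)

theorem edg_symm (ps : List (Nat × Nat)) (u v : Nat) (h : Edg ps u v) : Edg ps v u := by
  unfold Edg at h ⊢
  tauto

theorem edg_bound (ps : List (Nat × Nat)) (F : PFacts ps) (u v : Nat) (h : Edg ps u v) :
    u ≤ ps.length ∧ v ≤ ps.length := by
  rcases h with ⟨h1, h2, h3⟩ | ⟨h1, h2, h3⟩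
  · have := F.f1 u h1 h2
    omega
  · have := F.f1 v h1 h2
    omega

theorem edg_adj (ps : List (Nat × Nat)) (N : Nat) (F : PFacts ps) (hmN : ps.length < N)
    (u w : Nat) : w ∈ (buildTree N ps).getD u [] ↔ Edg ps u w := by
  rw [adj_buildTree N ps (hp_of_F ps F) hmN u, List.mem_append, mem_chl]
  unfold Edg
  constructor
  · rintro (h | h)
    · by_cases hc : 1 ≤ u ∧ u ≤ ps.length
      · rw [if_pos hc] at h
        have : w = par ps u := by simpa using h
        exact Or.inl ⟨hc.1, hc.2, this.symm⟩
      · rw [if_neg hc] at h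
        simp at h
    · exact Or.inr h
  · rintro (⟨h1, h2, h3⟩ | h)
    · left
      rw [if_pos ⟨h1, h2⟩]
      simp [h3]
    · exact Or.inr h

-- the facts about the distance-to-K function that BFS correctness consumes
structure DFacts (ps : List (Nat × Nat)) (K : Nat) (D : Nat → Int) : Prop where
  hKM : K ≤ ps.length
  d0 : D K = 0
  dpos : ∀ v, v ≤ ps.length → 0 ≤ D v
  dzero : ∀ v, v ≤ ps.length → D v = 0 → v = K
  dstep : ∀ w, 1 ≤ w → w ≤ ps.length →
      D w = D (par ps w) + 1 ∨ D (par ps w) = D w + 1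
  d2 : ∀ v, v ≤ ps.length → v ≠ K → ∃ w, Edg ps v w ∧ D v = D w + 1

theorem dfacts_edge (ps : List (Nat × Nat)) (K : Nat) (D : Nat → Int)
    (DF : DFacts ps K D) (u v : Nat) (h : Edg ps u v) :
    D v = D u + 1 ∨ D u = D v + 1 := by
  rcases h with ⟨h1, h2, h3⟩ | ⟨h1, h2, h3⟩
  · have := DF.dstep u h1 h2
    rw [h3] at this
    tauto
  · have := DF.dstep v h1 h2
    rw [h3] at this
    tauto

-- ----- BFS-2 invariant: dist values correct along the queue -----

structure BInv2 (ps : List (Nat × Nat)) (N : Nat) (K : Nat) (q : List Nat) (head : Nat)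
    (dist : List Int) : Prop where
  hq0 : q.getD 0 0 = K
  hqne : q ≠ []
  hnd : q.Nodup
  hbound : ∀ v ∈ q, v ≤ ps.length
  hdlen : dist.length = N
  hvis : ∀ v, v ≤ ps.length → ((dist.getD v (-1) ≠ -1) ↔ v ∈ q)
  hvis2 : ∀ v, ps.length < v → dist.getD v (-1) = -1
  hK0 : dist.getD K (-1) = 0
  hsort : q.Pairwise (fun a b => dist.getD a (-1) ≤ dist.getD b (-1))
  hhead : head ≤ q.length
  hup : ∀ j, 0 < j → j < q.length → ∃ i, i < j ∧ i < head ∧ Edg ps (q.getD i 0) (q.getD j 0) ∧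
          dist.getD (q.getD j 0) (-1) = dist.getD (q.getD i 0) (-1) + 1
  hproc : ∀ w ∈ q.take head, ∀ v, Edg ps w v → v ∈ q ∧ dist.getD v (-1) ≤ dist.getD w (-1) + 1

-- the inner neighbour fold of the second BFS
theorem visit2_fold (ps : List (Nat × Nat)) (N : Nat) (F : PFacts ps) (hmN : ps.length < N)
    (u : Nat) (l : List Nat) :
    ∀ (q : List Nat) (dist : List Int) (far : Nat),
    (∀ c ∈ l, Edg ps u c) →
    dist.length = N →
    (∀ v, v ≤ ps.length → ((dist.getD v (-1) ≠ -1) ↔ v ∈ q)) →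
    (∀ v, ps.length < v → dist.getD v (-1) = -1) →
    (∀ x ∈ dist, -1 ≤ x) →
    q.Nodup →
    (∀ v ∈ q, v ≤ ps.length) →
    u ∈ q →
    (∀ y ∈ q, dist.getD y (-1) ≤ dist.getD u (-1) + 1) →
    (∃ ext, (l.foldl (visitA u) (q, dist, far)).1 = q ++ ext ∧
        (∀ c ∈ ext, Edg ps u c ∧
          (l.foldl (visitA u) (q, dist, far)).2.1.getD c (-1) = dist.getD u (-1) + 1)) ∧
    (∀ y ∈ q, (l.foldl (visitA u) (q, dist, far)).2.1.getD y (-1) = dist.getD y (-1)) ∧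
    (l.foldl (visitA u) (q, dist, far)).2.1.length = N ∧
    (∀ v, v ≤ ps.length → (((l.foldl (visitA u) (q, dist, far)).2.1.getD v (-1) ≠ -1) ↔
        v ∈ (l.foldl (visitA u) (q, dist, far)).1)) ∧
    (∀ v, ps.length < v → (l.foldl (visitA u) (q, dist, far)).2.1.getD v (-1) = -1) ∧
    (l.foldl (visitA u) (q, dist, far)).1.Nodup ∧
    (∀ v ∈ (l.foldl (visitA u) (q, dist, far)).1, v ≤ ps.length) ∧
    (∀ c ∈ l, c ∈ (l.foldl (visitA u) (q, dist, far)).1 ∧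
      (l.foldl (visitA u) (q, dist, far)).2.1.getD c (-1) ≤ dist.getD u (-1) + 1) := by
  induction l with
  | nil =>
    intro q dist far _ hdlen hvis hvis2 hge hnd hbound hu hlb
    exact ⟨⟨[], by simp, by simp⟩, fun y _ => rfl, hdlen, hvis, hvis2, hnd, hbound, by simp⟩
  | cons c t ih =>
    intro q dist far hl hdlen hvis hvis2 hge hnd hbound hu hlb
    simp only [List.foldl_cons]
    have hcE := hl c List.mem_cons_self
    have hcM : c ≤ ps.length := (edg_bound ps F u c hcE).2
    have huM : u ≤ ps.length := (edg_bound ps F u c hcE).1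
    have hclen : c < dist.length := by omega
    have huval : dist.getD u (-1) ≠ -1 := (hvis u huM).2 hu
    have huge : -1 ≤ dist.getD u (-1) := by
      rw [List.getD_eq_getElem dist (-1) (by omega)]
      exact hge _ (List.getElem_mem _)
    by_cases hg2 : dist.getD c (-1) = -1
    · -- c is fresh: appended with value dist[u] + 1
      have hdc : dist[c] = -1 := by
        have h2 := hg2
        rwa [List.getD_eq_getElem dist (-1) hclen] at h2
      have hv : visitA u (q, dist, far) c = (q ++ [c], dist.set c (dist.getD u (-1) + 1), c) := by
        simp [visitA, hclen, hdc]
      rw [hv]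
      have hcq : c ∉ q := fun hcq => ((hvis c hcM).2 hcq) hg2
      have hunec : u ≠ c := fun hh => hcq (hh ▸ hu)
      have hset_u : (dist.set c (dist.getD u (-1) + 1)).getD u (-1) = dist.getD u (-1) :=
        getD_set_ne _ _ _ _ _ (fun hh => hunec hh.symm)
      have hset_c : (dist.set c (dist.getD u (-1) + 1)).getD c (-1) = dist.getD u (-1) + 1 :=
        getD_set_self _ _ _ _ hclen
      obtain ⟨⟨ext, hext, hextv⟩, hold, C3, C4, C5, C6, C7, C8⟩ :=
        ih (q ++ [c]) (dist.set c (dist.getD u (-1) + 1)) c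
          (fun c' h => hl c' (List.mem_cons_of_mem c h))
          (by rw [List.length_set]; exact hdlen)
          (by
            intro v hvm
            by_cases hvc : v = c
            · subst hvc
              rw [hset_c]
              constructor
              · intro _
                exact List.mem_append_right _ (by simp)
              · intro _
                omega
            · rw [getD_set_ne _ _ _ _ _ (fun hh => hvc hh.symm), hvis v hvm]
              constructor
              · exact fun h => List.mem_append_left _ h
              · intro h
                rcases List.mem_append.1 h with h | h
                · exact h
                · exact absurd (by simpa using h) hvc)
          (by
            intro v hvm
            rw [getD_set_ne _ _ _ _ _ (by omega)]
            exact hvis2 v hvm)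
          (by
            intro x hx
            rcases List.mem_or_eq_of_mem_set hx with h | h
            · exact hge x h
            · omega)
          (by
            rw [List.nodup_append]
            refine ⟨hnd, List.nodup_singleton c, ?_⟩
            intro a ha b hb
            have hb' : b = c := by simpa using hb
            intro hab
            subst hb'
            exact hcq (hab ▸ ha))
          (by
            intro v hv'
            rcases List.mem_append.1 hv' with h | h
            · exact hbound v h
            · have : v = c := by simpa using h
              subst this
              exact hcM)
          (List.mem_append_left _ hu)
          (by
            intro y hy
            rcases List.mem_append.1 hy with h | h
            · rw [hset_u, getD_set_ne _ _ _ _ _ (fun hh => hcq (by rw [hh]; exact h))]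
              exact hlb y h
            · have : y = c := by simpa using h
              subst this
              rw [hset_u, hset_c])
      rw [hset_u] at hextv
      refine ⟨⟨c :: ext, by rw [hext]; simp, ?_⟩, ?_, C3, C4, C5, C6, C7, ?_⟩
      · intro c' hc'
        rcases List.mem_cons.1 hc' with hc0 | h
        · rw [hc0]
          refine ⟨hcE, ?_⟩
          rw [hold c (List.mem_append_right _ (by simp)), hset_c]
        · exact hextv c' h
      · intro y hy
        rw [hold y (List.mem_append_left _ hy),
            getD_set_ne _ _ _ _ _ (fun hh => hcq (by rw [hh]; exact hy))]
      · intro c' hc'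
        rcases List.mem_cons.1 hc' with hc0 | h
        · rw [hc0]
          constructor
          · rw [hext]
            exact List.mem_append_left _ (List.mem_append_right _ (by simp))
          · rw [hold c (List.mem_append_right _ (by simp)), hset_c]
        · obtain ⟨h1, h2⟩ := C8 c' h
          rw [hset_u] at h2
          exact ⟨h1, h2⟩
    · -- c already visited: state unchanged
      have hv : visitA u (q, dist, far) c = (q, dist, far) := by
        simp only [visitA,
          if_neg (show ¬ (c < dist.length ∧ dist.getD c (-1) = -1) from fun hh => hg2 hh.2)]
      rw [hv]
      have hcq : c ∈ q := (hvis c hcM).1 hg2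
      obtain ⟨C1, C2, C3, C4, C5, C6, C7, C8⟩ :=
        ih q dist far (fun c' h => hl c' (List.mem_cons_of_mem c h))
          hdlen hvis hvis2 hge hnd hbound hu hlb
      refine ⟨C1, C2, C3, C4, C5, C6, C7, ?_⟩
      intro c' hc'
      rcases List.mem_cons.1 hc' with hc0 | h
      · rw [hc0]
        constructor
        · obtain ⟨ext, hext, _⟩ := C1
          rw [hext]
          exact List.mem_append_left _ hcq
        · rw [C2 c hcq]
          exact hlb c hcq
      · exact C8 c' h

-- one iteration of the second BFS preserves the invariant
theorem bfs2_step (ps : List (Nat × Nat)) (N : Nat) (F : PFacts ps) (hmN : ps.length < N)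
    (K : Nat) (q : List Nat) (head : Nat) (dist : List Int) (far : Nat)
    (inv : BInv2 ps N K q head dist) (hlt : head < q.length) (hge : ∀ x ∈ dist, -1 ≤ x) :
    BInv2 ps N K
      (((buildTree N ps).getD (q.getD head 0) []).foldl (visitA (q.getD head 0)) (q, dist, far)).1
      (head + 1)
      (((buildTree N ps).getD (q.getD head 0) []).foldl (visitA (q.getD head 0)) (q, dist, far)).2.1 := by
  generalize hgen : q.getD head 0 = u
  have hu' : u = q[head] := by rw [← hgen]; exact List.getD_eq_getElem q 0 hlt
  have huq : u ∈ q := by rw [hu']; exact List.getElem_mem hlt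
  have hum : u ≤ ps.length := inv.hbound u huq
  have hlb : ∀ y ∈ q, dist.getD y (-1) ≤ dist.getD u (-1) + 1 := by
    intro y hy
    obtain ⟨j, hj, rfl⟩ := List.mem_iff_getElem.1 hy
    rcases Nat.lt_trichotomy j head with hjh | hjh | hjh
    · have := List.pairwise_iff_getElem.1 inv.hsort j head hj hlt hjh
      rw [← hu'] at this
      omega
    · subst hjh
      rw [← hu']
      omega
    · obtain ⟨i, hij, hih, hE, hval⟩ := inv.hup j (by omega) hj
      have hilen : i < q.length := by omega
      have hyD : q.getD j 0 = q[j] := List.getD_eq_getElem q 0 hj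
      have hiD : q.getD i 0 = q[i] := List.getD_eq_getElem q 0 hilen
      rw [hyD, hiD] at hval
      have hle : dist.getD q[i] (-1) ≤ dist.getD q[head] (-1) := by
        rcases Nat.lt_or_ge i head with h | h
        · exact List.pairwise_iff_getElem.1 inv.hsort i head hilen hlt h
        · have : i = head := by omega
          subst this
          exact le_refl _
      rw [← hu'] at hle
      omega
  have hl : ∀ c ∈ (buildTree N ps).getD u [], Edg ps u c :=
    fun c hc => (edg_adj ps N F hmN u c).1 hc
  obtain ⟨⟨ext, hext, hextv⟩, C2, C3, C4, C5, C6, C7, C8⟩ :=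
    visit2_fold ps N F hmN u ((buildTree N ps).getD u []) q dist far hl
      inv.hdlen inv.hvis inv.hvis2 hge inv.hnd inv.hbound huq hlb
  have hKq : K ∈ q := by
    have hlen0 : 0 < q.length := by omega
    have : q.getD 0 0 = q[0] := List.getD_eq_getElem q 0 hlen0
    rw [inv.hq0] at this
    rw [this]
    exact List.getElem_mem hlen0
  refine ⟨?_, ?_, C6, C7, C3, C4, C5, ?_, ?_, ?_, ?_, ?_⟩
  · rw [hext, getD_append_left' _ _ _ _ (by omega)]
    exact inv.hq0
  · rw [hext]
    intro hcontra
    rcases List.append_eq_nil_iff.1 hcontra with ⟨h, _⟩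
    exact inv.hqne h
  · rw [C2 K hKq]
    exact inv.hK0
  · rw [hext]
    refine List.pairwise_append.2 ⟨?_, ?_, ?_⟩
    · refine List.Pairwise.imp_of_mem ?_ inv.hsort
      intro a b ha hb hab
      rw [C2 a ha, C2 b hb]
      exact hab
    · refine List.pairwise_of_forall_mem_list ?_
      intro a ha b hb
      rw [(hextv a ha).2, (hextv b hb).2]
    · intro y hy c hc
      rw [C2 y hy, (hextv c hc).2]
      exact hlb y hy
  · rw [hext]
    simp only [List.length_append]
    omega
  · intro j hj0 hjlen
    rw [hext] at hjlen
    simp only [List.length_append] at hjlen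
    by_cases hjq : j < q.length
    · obtain ⟨i, hij, hih, hE, hval⟩ := inv.hup j hj0 hjq
      have hilen : i < q.length := by omega
      have hmemj : q.getD j 0 ∈ q := by
        rw [List.getD_eq_getElem q 0 hjq]; exact List.getElem_mem hjq
      have hmemi : q.getD i 0 ∈ q := by
        rw [List.getD_eq_getElem q 0 hilen]; exact List.getElem_mem hilen
      refine ⟨i, hij, by omega, ?_, ?_⟩
      · rw [hext, getD_append_left' _ _ _ _ hjq, getD_append_left' _ _ _ _ hilen]
        exact hE
      · rw [hext, getD_append_left' _ _ _ _ hjq, getD_append_left' _ _ _ _ hilen,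
            C2 _ hmemj, C2 _ hmemi]
        exact hval
    · have hjq' : q.length ≤ j := by omega
      have he : (q ++ ext).getD j 0 = ext.getD (j - q.length) 0 := getD_append_right' _ _ _ _ hjq'
      have hexlen : j - q.length < ext.length := by omega
      have hmemext : ext.getD (j - q.length) 0 ∈ ext := by
        rw [List.getD_eq_getElem ext 0 hexlen]
        exact List.getElem_mem hexlen
      refine ⟨head, by omega, by omega, ?_, ?_⟩
      · rw [hext, he, getD_append_left' _ _ _ _ hlt, hgen]
        exact (hextv _ hmemext).1
      · rw [hext, he, getD_append_left' _ _ _ _ hlt, hgen,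
            (hextv _ hmemext).2, C2 u huq]
  · intro w hw v hEv
    rw [hext, List.take_append_of_le_length (by omega), List.take_add_one] at hw
    have hsome : q[head]?.toList = [q[head]] := by
      rw [List.getElem?_eq_getElem hlt]
      rfl
    rw [hsome] at hw
    rcases List.mem_append.1 hw with h | h
    · have hwq : w ∈ q := (List.take_sublist head q).subset h
      obtain ⟨hv1, hv2⟩ := inv.hproc w h v hEv
      constructor
      · rw [hext]
        exact List.mem_append_left _ hv1
      · rw [C2 v hv1, C2 w hwq]
        exact hv2
    · have hwu : w = u := by rw [hu']; simpa using h
      subst hwu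
      have hvl : v ∈ (buildTree N ps).getD w [] := (edg_adj ps N F hmN w v).2 hEv
      obtain ⟨h1, h2⟩ := C8 v hvl
      refine ⟨h1, ?_⟩
      rw [C2 w huq]
      exact h2

-- running the second BFS to completion
theorem bfs2_loop (ps : List (Nat × Nat)) (N : Nat) (F : PFacts ps) (hmN : ps.length < N)
    (K : Nat) :
    ∀ (μ : Nat) (q : List Nat) (head : Nat) (dist : List Int) (far : Nat),
      (∀ x ∈ dist, -1 ≤ x) →
      negCount dist + q.length - head ≤ μ → BInv2 ps N K q head dist →
      ∃ q' dist', BInv2 ps N K q' q'.length dist' ∧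
        (bfsLoopA (buildTree N ps) μ q head dist far).2 = dist' := by
  intro μ
  induction μ with
  | zero =>
    intro q head dist far hA hμ inv
    have heq : head = q.length := by
      have h1 := inv.hhead
      omega
    subst heq
    exact ⟨q, dist, inv, rfl⟩
  | succ μ ihμ =>
    intro q head dist far hA hμ inv
    show ∃ q' dist', _ ∧ (if head < q.length then _ else (far, dist)).2 = dist'
    by_cases hlt : head < q.length
    · rw [if_pos hlt]
      have hb := (visitA_fold_bound (q.getD head 0) ((buildTree N ps).getD (q.getD head 0) []) q dist far hA).2
      exact ihμ _ _ _ _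
        (visitA_fold_bound (q.getD head 0) ((buildTree N ps).getD (q.getD head 0) []) q dist far hA).1
        (by omega) (bfs2_step ps N F hmN K q head dist far inv hlt hA)
    · rw [if_neg hlt]
      have heq : head = q.length := by
        have h1 := inv.hhead
        omega
      subst heq
      exact ⟨q, dist, inv, rfl⟩

-- at completion the dist array is exactly the distance-to-K function
theorem bfs2_values (ps : List (Nat × Nat)) (N : Nat) (F : PFacts ps) (K : Nat) (D : Nat → Int)
    (DF : DFacts ps K D) (q : List Nat) (dist : List Int)
    (inv : BInv2 ps N K q q.length dist) :
    ∀ v, v ≤ ps.length → dist.getD v (-1) = D v := by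
  have hKq : K ∈ q := by
    have hlen0 : 0 < q.length := List.length_pos_of_ne_nil inv.hqne
    have : q.getD 0 0 = q[0] := List.getD_eq_getElem q 0 hlen0
    rw [inv.hq0] at this
    rw [this]
    exact List.getElem_mem hlen0
  have htake : q.take q.length = q := List.take_of_length_le (le_refl _)
  -- completeness: every tree node is reached
  have hcomp : ∀ (t : Nat) (v : Nat), v ≤ ps.length → (D v).toNat ≤ t → v ∈ q := by
    intro t
    induction t with
    | zero =>
      intro v hv ht
      have h0 : D v = 0 := by
        have := DF.dpos v hv
        omega
      rw [DF.dzero v hv h0]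
      exact hKq
    | succ t iht =>
      intro v hv ht
      by_cases hvK : v = K
      · rw [hvK]; exact hKq
      · obtain ⟨w, hE, hval⟩ := DF.d2 v hv hvK
        have hwm : w ≤ ps.length := (edg_bound ps F v w hE).2
        have hwq : w ∈ q := iht w hwm (by
          have h1 := DF.dpos w hwm
          have h2 := DF.dpos v hv
          omega)
        exact (inv.hproc w (by rw [htake]; exact hwq) v (edg_symm _ _ _ hE)).1
  -- the stored value never undershoots the distance
  have hlow : ∀ j, j < q.length → D (q.getD j 0) ≤ dist.getD (q.getD j 0) (-1) := by
    intro j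
    induction j using Nat.strong_induction_on with
    | _ j ihj =>
      intro hj
      by_cases hj0 : j = 0
      · subst hj0
        rw [inv.hq0, DF.d0, inv.hK0]
      · obtain ⟨i, hij, hih, hE, hval⟩ := inv.hup j (by omega) hj
        have hd1 := dfacts_edge ps K D DF _ _ hE
        have := ihj i (by omega) (by omega)
        omega
  -- nor overshoots it
  have hupp : ∀ (t : Nat) (v : Nat), v ≤ ps.length → (D v).toNat ≤ t → dist.getD v (-1) ≤ D v := by
    intro t
    induction t with
    | zero =>
      intro v hv ht
      have h0 : D v = 0 := by
        have := DF.dpos v hv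
        omega
      have hvK := DF.dzero v hv h0
      subst hvK
      rw [inv.hK0, h0]
    | succ t iht =>
      intro v hv ht
      by_cases hvK : v = K
      · rw [hvK, inv.hK0, DF.d0]
      · obtain ⟨w, hE, hval⟩ := DF.d2 v hv hvK
        have hwm : w ≤ ps.length := (edg_bound ps F v w hE).2
        have hw := iht w hwm (by
          have h1 := DF.dpos w hwm
          have h2 := DF.dpos v hv
          omega)
        have hwq : w ∈ q := hcomp ((D w).toNat) w hwm (le_refl _)
        have := (inv.hproc w (by rw [htake]; exact hwq) v (edg_symm _ _ _ hE)).2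
        omega
  intro v hv
  have h1 := hupp (D v).toNat v hv (le_refl _)
  obtain ⟨j, hj, hje⟩ := List.mem_iff_getElem.1 (hcomp (D v).toNat v hv (le_refl _))
  have h2 := hlow j hj
  rw [List.getD_eq_getElem q 0 hj, hje] at h2
  omega

theorem binv2_init (ps : List (Nat × Nat)) (N K : Nat) (hKM : K ≤ ps.length)
    (hmN : ps.length < N) :
    BInv2 ps N K [K] 0 ((List.replicate N (-1 : Int)).set K 0) := by
  have hlen : (List.replicate N (-1 : Int)).length = N := by simp
  have hKN : K < N := by omega
  refine ⟨rfl, by simp, List.nodup_singleton K, ?_, by simp, ?_, ?_, ?_,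
    List.pairwise_singleton _ _, by simp, ?_, ?_⟩
  · intro v hv
    have : v = K := by simpa using hv
    omega
  · intro v hvm
    by_cases hv0 : v = K
    · subst hv0
      rw [getD_set_self _ _ _ _ (by rw [hlen]; omega)]
      simp
    · rw [getD_set_ne _ _ _ _ _ (fun hh => hv0 hh.symm), getD_replicate_self]
      simp [hv0]
  · intro v hvm
    rw [getD_set_ne _ _ _ _ _ (by omega), getD_replicate_self]
  · exact getD_set_self _ _ _ _ (by rw [hlen]; omega)
  · intro j h1 h2
    simp at h2
    omega
  · intro w hw
    simp at hw
-- the full second BFS result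
theorem bfsA2_dist (ps : List (Nat × Nat)) (N : Nat) (F : PFacts ps) (hmN : ps.length < N)
    (K : Nat) (D : Nat → Int) (DF : DFacts ps K D) :
    (bfsA (buildTree N ps) N K).2
      = (List.range N).map (fun v => if v ≤ ps.length then D v else -1) := by
  unfold bfsA
  obtain ⟨q', dist', inv', heq⟩ := bfs2_loop ps N F hmN K
    (N + 1) [K] 0
    ((List.replicate N (-1 : Int)).set K 0) K
    (by
      intro x hx
      rcases List.mem_or_eq_of_mem_set hx with h | h
      · have := List.eq_of_mem_replicate h
        omega
      · omega)
    (by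
      have h2 : negCount ((List.replicate N (-1 : Int)).set K 0)
          ≤ ((List.replicate N (-1 : Int)).set K 0).length := List.countP_le_length
      simp at h2 ⊢
      omega)
    (binv2_init ps N K DF.hKM hmN)
  rw [heq]
  apply List.ext_getElem
  · rw [inv'.hdlen]
    simp
  · intro v hv1 hv2
    have hvN : v < N := by rwa [inv'.hdlen] at hv1
    have hget : dist'[v] = dist'.getD v (-1) := by
      rw [List.getD_eq_getElem dist' (-1) hv1]
    rw [hget]
    by_cases hvm : v ≤ ps.length
    · rw [bfs2_values ps N F K D DF q' dist' inv' v hvm]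
      simp [hvm]
    · rw [inv'.hvis2 v (by omega)]
      simp [hvm]

-- ----- instantiating the distance-to-K function from B's computed data -----

def onpB (n : Nat) (ps : List (Nat × Nat)) (K : Nat) : List Bool :=
  markPath (parList n ps) (List.replicate n false) K (K + 1)

def lfB (n : Nat) (ps : List (Nat × Nat)) (K : Nat) (v : Nat) : Nat :=
  lfin (parList n ps) (depList n ps) (onpB n ps K) v

def DB (n : Nat) (ps : List (Nat × Nat)) (K : Nat) (v : Nat) : Int :=
  (dep ps K : Int) + (dep ps v : Int) - 2 * (lfB n ps K v : Int)

theorem hdecn_of (ps : List (Nat × Nat)) (F : PFacts ps) (n : Nat) :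
    ∀ b, 1 ≤ b → b < n → (parList n ps).getD b 0 < b := by
  intro b h1 hb
  rw [parList_getD n ps b hb, if_neg (by omega)]
  by_cases hbM : b ≤ ps.length
  · exact F.f1 b h1 hbM
  · rw [par_big ps b (by omega)]
    omega

theorem onpB_iff (ps : List (Nat × Nat)) (F : PFacts ps) (n : Nat) (hmN : ps.length < n)
    (K : Nat) (hKM : K ≤ ps.length) (v : Nat) :
    ((onpB n ps K).getD v false = true ↔ v ∈ chainL (parList n ps) K (K + 1)) := by
  unfold onpB
  rw [markPath_getD (parList n ps) (K + 1) (List.replicate n false) K v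
      (by rw [List.length_replicate]; omega)
      (by
        rw [List.length_replicate]
        exact fun b h1 h2 => hdecn_of ps F n b h1 h2),
      getD_replicate_self]
  simp

theorem onpB_zero (ps : List (Nat × Nat)) (F : PFacts ps) (n : Nat) (hmN : ps.length < n)
    (K : Nat) (hKM : K ≤ ps.length) : (onpB n ps K).getD 0 false = true := by
  rw [onpB_iff ps F n hmN K hKM 0]
  exact chainL_zero_mem (parList n ps) K (K + 1) (by omega)
    (fun b h1 h2 => hdecn_of ps F n b h1 (by omega))

theorem hplB (ps : List (Nat × Nat)) (n : Nat) (hmN : ps.length < n) :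
    ∀ b, 1 ≤ b → b ≤ ps.length → (parList n ps).getD b 0 = par ps b := by
  intro b h1 h2
  rw [parList_getD n ps b (by omega), if_neg (by omega)]

theorem lfB_le (ps : List (Nat × Nat)) (F : PFacts ps) (n : Nat) (hmN : ps.length < n)
    (K : Nat) (hKM : K ≤ ps.length) :
    ∀ v, v ≤ ps.length → lfB n ps K v ≤ dep ps v ∧ lfB n ps K v ≤ dep ps K := by
  intro v
  induction v using Nat.strong_induction_on with
  | _ v ihv =>
    intro hv
    have hunf := lfin_unfold (parList n ps) (depList n ps) (onpB n ps K) ps.length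
      (fun b h1 h2 => hdecn_of ps F n b h1 (by omega))
      (onpB_zero ps F n hmN K hKM) v hv
    by_cases hon : (onpB n ps K).getD v false
    · rw [if_pos hon] at hunf
      unfold lfB
      rw [hunf, depList_getD n ps v (by omega)]
      have hch := (onpB_iff ps F n hmN K hKM v).1 hon
      have := chainL_dep ps F (parList n ps) (hplB ps n hmN) K (K + 1) v hKM hch
      exact ⟨le_refl _, this.1⟩
    · have hv1 : 1 ≤ v := by
        by_contra hh
        have : v = 0 := by omega
        subst this
        exact hon (onpB_zero ps F n hmN K hKM)
      rw [if_neg hon, hplB ps n hmN v hv1 hv] at hunf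
      have hpv : par ps v < v := F.f1 v hv1 hv
      have hd2 : dep ps v = dep ps (par ps v) + 1 := F.f2 v hv1 hv
      obtain ⟨ih1, ih2⟩ := ihv (par ps v) hpv (by omega)
      unfold lfB
      rw [hunf]
      exact ⟨by unfold lfB at ih1; omega, by unfold lfB at ih2; exact ih2⟩

theorem lfB_onp (ps : List (Nat × Nat)) (F : PFacts ps) (n : Nat) (hmN : ps.length < n)
    (K : Nat) (hKM : K ≤ ps.length) (v : Nat) (hv : v ≤ ps.length)
    (hon : (onpB n ps K).getD v false = true) : lfB n ps K v = dep ps v := by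
  have hunf := lfin_unfold (parList n ps) (depList n ps) (onpB n ps K) ps.length
    (fun b h1 h2 => hdecn_of ps F n b h1 (by omega))
    (onpB_zero ps F n hmN K hKM) v hv
  rw [if_pos hon] at hunf
  unfold lfB
  rw [hunf, depList_getD n ps v (by omega)]

theorem lfB_notonp (ps : List (Nat × Nat)) (F : PFacts ps) (n : Nat) (hmN : ps.length < n)
    (K : Nat) (hKM : K ≤ ps.length) (v : Nat) (hv : v ≤ ps.length)
    (hon : ¬ (onpB n ps K).getD v false = true) :
    1 ≤ v ∧ lfB n ps K v = lfB n ps K (par ps v) := by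
  have hv1 : 1 ≤ v := by
    by_contra hh
    have : v = 0 := by omega
    subst this
    exact hon (onpB_zero ps F n hmN K hKM)
  have hunf := lfin_unfold (parList n ps) (depList n ps) (onpB n ps K) ps.length
    (fun b h1 h2 => hdecn_of ps F n b h1 (by omega))
    (onpB_zero ps F n hmN K hKM) v hv
  rw [if_neg hon, hplB ps n hmN v hv1 hv] at hunf
  exact ⟨hv1, hunf⟩

theorem lfB_eq_dep_onp (ps : List (Nat × Nat)) (F : PFacts ps) (n : Nat) (hmN : ps.length < n)
    (K : Nat) (hKM : K ≤ ps.length) (v : Nat) (hv : v ≤ ps.length)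
    (heq : lfB n ps K v = dep ps v) : (onpB n ps K).getD v false = true := by
  by_contra hon
  obtain ⟨hv1, hstep⟩ := lfB_notonp ps F n hmN K hKM v hv hon
  have hpv : par ps v < v := F.f1 v hv1 hv
  have hd2 : dep ps v = dep ps (par ps v) + 1 := F.f2 v hv1 hv
  have := (lfB_le ps F n hmN K hKM (par ps v) (by omega)).1
  omega

-- B's step on a marked node versus its parent, as a DB equation
theorem dB_par (ps : List (Nat × Nat)) (F : PFacts ps) (n : Nat) (hmN : ps.length < n)
    (K : Nat) (hKM : K ≤ ps.length) (w : Nat) (h1 : 1 ≤ w) (h2 : w ≤ ps.length) :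
    (¬ (onpB n ps K).getD w false = true → DB n ps K w = DB n ps K (par ps w) + 1) ∧
    ((onpB n ps K).getD w false = true → DB n ps K (par ps w) = DB n ps K w + 1) := by
  have hd2 : dep ps w = dep ps (par ps w) + 1 := F.f2 w h1 h2
  constructor
  · intro hon
    obtain ⟨_, hstep⟩ := lfB_notonp ps F n hmN K hKM w h2 hon
    unfold DB
    rw [hstep]
    push_cast
    omega
  · intro hon
    have hch := (onpB_iff ps F n hmN K hKM w).1 hon
    have hparch : par ps w ∈ chainL (parList n ps) K (K + 1) := by
      have := chainL_par_mem (parList n ps) K (K + 1) w (by omega)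
        (fun b hb1 hb2 => hdecn_of ps F n b hb1 (by omega)) hch h1
      rwa [hplB ps n hmN w h1 h2] at this
    have honp : (onpB n ps K).getD (par ps w) false = true :=
      (onpB_iff ps F n hmN K hKM (par ps w)).2 hparch
    have hl1 : lfB n ps K w = dep ps w := lfB_onp ps F n hmN K hKM w h2 hon
    have hl2 : lfB n ps K (par ps w) = dep ps (par ps w) := by
      have hpm : par ps w ≤ ps.length := by
        have := F.f1 w h1 h2
        omega
      exact lfB_onp ps F n hmN K hKM (par ps w) hpm honp
    unfold DB
    rw [hl1, hl2]
    push_cast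
    omega

theorem dfacts_B (ps : List (Nat × Nat)) (F : PFacts ps) (n : Nat) (hmN : ps.length < n)
    (K : Nat) (hKM : K ≤ ps.length) : DFacts ps K (DB n ps K) := by
  have honK : (onpB n ps K).getD K false = true := by
    rw [onpB_iff ps F n hmN K hKM K]
    exact chainL_self (parList n ps) K K
  refine ⟨hKM, ?_, ?_, ?_, ?_, ?_⟩
  · have := lfB_onp ps F n hmN K hKM K hKM honK
    unfold DB
    rw [this]
    push_cast
    omega
  · intro v hv
    obtain ⟨h1, h2⟩ := lfB_le ps F n hmN K hKM v hv
    unfold DB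
    push_cast
    omega
  · intro v hv h0
    obtain ⟨h1, h2⟩ := lfB_le ps F n hmN K hKM v hv
    have heq : lfB n ps K v = dep ps v ∧ lfB n ps K v = dep ps K := by
      unfold DB at h0
      constructor <;> omega
    have hon := lfB_eq_dep_onp ps F n hmN K hKM v hv heq.1
    have hch := (onpB_iff ps F n hmN K hKM v).1 hon
    have hchK : K ∈ chainL (parList n ps) K (K + 1) := chainL_self (parList n ps) K K
    refine chainL_dep_inj ps F (parList n ps) (hplB ps n hmN) K (K + 1) v K hKM hch hchK ?_
    omega
  · intro w h1 h2
    obtain ⟨hno, hyes⟩ := dB_par ps F n hmN K hKM w h1 h2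
    by_cases hon : (onpB n ps K).getD w false = true
    · exact Or.inr (hyes hon)
    · exact Or.inl (hno hon)
  · intro v hv hvK
    by_cases hon : (onpB n ps K).getD v false = true
    · -- v on K's path but not K: its chain successor is a child with distance one less
      have hch := (onpB_iff ps F n hmN K hKM v).1 hon
      obtain ⟨c, hc1, hc2, hc3, hc4⟩ :=
        chainL_succ_mem (parList n ps) K (K + 1) v (by omega)
          (fun b hb1 hb2 => hdecn_of ps F n b hb1 (by omega)) hch
          (by
            intro hh
            exact hvK hh)
      have hcM : c ≤ ps.length := by omega
      rw [hplB ps n hmN c hc2 hcM] at hc4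
      have honc : (onpB n ps K).getD c false = true :=
        (onpB_iff ps F n hmN K hKM c).2 hc1
      have := (dB_par ps F n hmN K hKM c hc2 hcM).2 honc
      rw [hc4] at this
      exact ⟨c, Or.inr ⟨hc2, hcM, hc4⟩, this⟩
    · obtain ⟨hv1, _⟩ := lfB_notonp ps F n hmN K hKM v hv hon
      have := (dB_par ps F n hmN K hKM v hv1 hv).1 hon
      exact ⟨par ps v, Or.inl ⟨hv1, hv, rfl⟩, this⟩

-- ----- B's final loop: lca-depth DP and running maximum -----

theorem ecc_fold (ps : List (Nat × Nat)) (F : PFacts ps) (n : Nat) (hmN : ps.length < n)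
    (K : Nat) (hKM : K ≤ ps.length) :
    ∀ k, k ≤ ps.length + 1 →
    (((List.range k).foldl
        (eccStep (parList n ps) (depList n ps) (onpB n ps K) (dep ps K))
        (List.replicate n 0, 0)).1.length = n ∧
      (∀ u, u < k →
        ((List.range k).foldl
          (eccStep (parList n ps) (depList n ps) (onpB n ps K) (dep ps K))
          (List.replicate n 0, 0)).1.getD u 0 = lfB n ps K u)) ∧
    (0 ≤ ((List.range k).foldl
        (eccStep (parList n ps) (depList n ps) (onpB n ps K) (dep ps K))
        (List.replicate n 0, 0)).2 ∧
      (∀ u, u < k → DB n ps K u ≤ ((List.range k).foldl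
        (eccStep (parList n ps) (depList n ps) (onpB n ps K) (dep ps K))
        (List.replicate n 0, 0)).2) ∧
      (((List.range k).foldl
        (eccStep (parList n ps) (depList n ps) (onpB n ps K) (dep ps K))
        (List.replicate n 0, 0)).2 = 0 ∨
        ∃ u, u < k ∧ DB n ps K u = ((List.range k).foldl
        (eccStep (parList n ps) (depList n ps) (onpB n ps K) (dep ps K))
        (List.replicate n 0, 0)).2)) := by
  intro k
  induction k with
  | zero =>
    intro _
    refine ⟨⟨by simp, by omega⟩, le_refl _, by omega, Or.inl rfl⟩
  | succ k ih =>
    intro hk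
    have hkM : k ≤ ps.length := by omega
    have hkn : k < n := by omega
    obtain ⟨⟨hlen, hLv⟩, he0, hub, hat⟩ := ih (by omega)
    rw [List.range_succ, List.foldl_append]
    simp only [List.foldl_cons, List.foldl_nil]
    set st := (List.range k).foldl
      (eccStep (parList n ps) (depList n ps) (onpB n ps K) (dep ps K))
      (List.replicate n 0, 0) with hst
    show ((st.1.set k (if (onpB n ps K).getD k false then (depList n ps).getD k 0
              else st.1.getD ((parList n ps).getD k 0) 0)).length = n ∧
        (∀ u, u < k + 1 →
          (st.1.set k (if (onpB n ps K).getD k false then (depList n ps).getD k 0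
              else st.1.getD ((parList n ps).getD k 0) 0)).getD u 0 = lfB n ps K u)) ∧
      (0 ≤ (if st.2 < (dep ps K : Int) + ((depList n ps).getD k 0 : Int)
              - 2 * (((if (onpB n ps K).getD k false then (depList n ps).getD k 0
                  else st.1.getD ((parList n ps).getD k 0) 0 : Nat)) : Int)
            then (dep ps K : Int) + ((depList n ps).getD k 0 : Int)
              - 2 * (((if (onpB n ps K).getD k false then (depList n ps).getD k 0
                  else st.1.getD ((parList n ps).getD k 0) 0 : Nat)) : Int)
            else st.2) ∧
        (∀ u, u < k + 1 → DB n ps K u ≤ (if st.2 < (dep ps K : Int) + ((depList n ps).getD k 0 : Int)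
              - 2 * (((if (onpB n ps K).getD k false then (depList n ps).getD k 0
                  else st.1.getD ((parList n ps).getD k 0) 0 : Nat)) : Int)
            then (dep ps K : Int) + ((depList n ps).getD k 0 : Int)
              - 2 * (((if (onpB n ps K).getD k false then (depList n ps).getD k 0
                  else st.1.getD ((parList n ps).getD k 0) 0 : Nat)) : Int)
            else st.2)) ∧
        ((if st.2 < (dep ps K : Int) + ((depList n ps).getD k 0 : Int)
              - 2 * (((if (onpB n ps K).getD k false then (depList n ps).getD k 0
                  else st.1.getD ((parList n ps).getD k 0) 0 : Nat)) : Int)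
            then (dep ps K : Int) + ((depList n ps).getD k 0 : Int)
              - 2 * (((if (onpB n ps K).getD k false then (depList n ps).getD k 0
                  else st.1.getD ((parList n ps).getD k 0) 0 : Nat)) : Int)
            else st.2) = 0 ∨
          ∃ u, u < k + 1 ∧ DB n ps K u = (if st.2 < (dep ps K : Int) + ((depList n ps).getD k 0 : Int)
              - 2 * (((if (onpB n ps K).getD k false then (depList n ps).getD k 0
                  else st.1.getD ((parList n ps).getD k 0) 0 : Nat)) : Int)
            then (dep ps K : Int) + ((depList n ps).getD k 0 : Int)
              - 2 * (((if (onpB n ps K).getD k false then (depList n ps).getD k 0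
                  else st.1.getD ((parList n ps).getD k 0) 0 : Nat)) : Int)
            else st.2)))
    -- the computed lca depth at k is the abstract one
    have hlc : (if (onpB n ps K).getD k false then (depList n ps).getD k 0
        else st.1.getD ((parList n ps).getD k 0) 0) = lfB n ps K k := by
      by_cases hon : (onpB n ps K).getD k false
      · rw [if_pos hon]
        rw [depList_getD n ps k hkn]
        exact (lfB_onp ps F n hmN K hKM k hkM (by simpa using hon)).symm
      · rw [if_neg hon]
        obtain ⟨hk1, hstep⟩ := lfB_notonp ps F n hmN K hKM k hkM (by simpa using hon)
        rw [hplB ps n hmN k hk1 hkM]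
        have hpk : par ps k < k := F.f1 k hk1 hkM
        rw [hLv (par ps k) hpk, hstep]
    rw [hlc]
    have hd : (dep ps K : Int) + ((depList n ps).getD k 0 : Int)
        - 2 * ((lfB n ps K k : Nat) : Int) = DB n ps K k := by
      rw [depList_getD n ps k hkn]
      unfold DB
      push_cast
      ring
    rw [hd]
    constructor
    · constructor
      · rw [List.length_set]
        exact hlen
      · intro u hu
        by_cases huk : u = k
        · subst huk
          rw [getD_set_self _ _ _ _ (by omega)]
        · rw [getD_set_ne _ _ _ _ _ (fun hh => huk hh.symm)]
          exact hLv u (by omega)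
    · by_cases hcmp : st.2 < DB n ps K k
      · rw [if_pos hcmp]
        have hDpos : 0 ≤ DB n ps K k := by omega
        refine ⟨hDpos, ?_, Or.inr ⟨k, by omega, rfl⟩⟩
        intro u hu
        by_cases huk : u = k
        · subst huk
          exact le_refl _
        · have := hub u (by omega)
          omega
      · rw [if_neg hcmp]
        refine ⟨he0, ?_, ?_⟩
        · intro u hu
          by_cases huk : u = k
          · subst huk
            omega
          · exact hub u (by omega)
        · rcases hat with h | ⟨u, hu, hval⟩
          · exact Or.inl h
          · exact Or.inr ⟨u, by omega, hval⟩

-- ----- the maximum of A's dist array equals B's running maximum -----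

theorem max_eq_ecc (N M : Nat) (D : Nat → Int) (hN : 1 ≤ N) (hM : M < N)
    (K : Nat) (hKM : K ≤ M) (hK0 : D K = 0)
    (e : Int) (he0 : 0 ≤ e) (hub : ∀ u, u ≤ M → D u ≤ e)
    (hat : e = 0 ∨ ∃ u, u ≤ M ∧ D u = e) :
    (PySem.List.max? ((List.range N).map (fun v => if v ≤ M then D v else -1))
      (fun x => x)).getD 0 = e := by
  set l := (List.range N).map (fun v => if v ≤ M then D v else -1) with hl
  have hlne : l ≠ [] := by
    rw [hl]
    intro hh
    have := congrArg List.length hh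
    simp at this
    omega
  rcases hx : PySem.List.max? l (fun x => x) with _ | x
  · exact absurd ((PySem.List.max?_eq_none_iff l (fun x => x)).1 hx) hlne
  · have hmem := PySem.List.max?_mem hx
    have hismax := PySem.List.max?_isMax hx
    have hK_in : (0 : Int) ∈ l := by
      rw [hl]
      refine List.mem_map.2 ⟨K, List.mem_range.2 (by omega), ?_⟩
      rw [if_pos hKM, hK0]
    have hx0 : (0 : Int) ≤ x := hismax 0 hK_in
    obtain ⟨v, hvN, hvx⟩ := List.mem_map.1 (hl ▸ hmem)
    have hvM : v ≤ M := by
      by_contra hh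
      rw [if_neg hh] at hvx
      omega
    rw [if_pos hvM] at hvx
    have hxe : x ≤ e := hvx ▸ hub v hvM
    have hex : e ≤ x := by
      rcases hat with h | ⟨u, hu, hval⟩
      · omega
      · have : D u ∈ l := by
          rw [hl]
          exact List.mem_map.2 ⟨u, List.mem_range.2 (by omega), by rw [if_pos hu]⟩
        have := hismax (D u) this
        omega
    have : x = e := le_antisymm hxe hex
    rw [this]
    rfl

-- unfolding B's port once its parse is rewritten
theorem alt_eq (n : Int) (log : String) (pl dl stk : List Nat) (cur cnt : Nat)
    (h : log.toList.foldl stepP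
        (List.replicate n.toNat 0, List.replicate n.toNat 0, ([] : List Nat), 0, 1)
      = (pl, dl, stk, cur, cnt)) :
    analyze_tree_alt n log =
      (PySem.Int.mod (((List.range cnt).foldl
          (eccStep pl dl
            (markPath pl (List.replicate n.toNat false) ((deepScan dl cnt).2)
              ((deepScan dl cnt).2 + 1))
            (dl.getD ((deepScan dl cnt).2) 0))
          (List.replicate n.toNat 0, 0)).2) 2 + 1,
       PySem.Int.floordiv (((List.range cnt).foldl
          (eccStep pl dl
            (markPath pl (List.replicate n.toNat false) ((deepScan dl cnt).2)
              ((deepScan dl cnt).2 + 1))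
            (dl.getD ((deepScan dl cnt).2) 0))
          (List.replicate n.toNat 0, 0)).2 + 1) 2,
       ((List.range cnt).foldl
          (eccStep pl dl
            (markPath pl (List.replicate n.toNat false) ((deepScan dl cnt).2)
              ((deepScan dl cnt).2 + 1))
            (dl.getD ((deepScan dl cnt).2) 0))
          (List.replicate n.toNat 0, 0)).2) := by
  unfold analyze_tree_alt
  rw [h]

-- ===== VERDICT (by name: the statement is the Claim_ definition above) =====
theorem analyze_tree_spec : Claim_equal_analyze_tree := by
  unfold Claim_equal_analyze_tree
  intro n log hdom hpre
  obtain ⟨hn1, hz, hbal⟩ := hpre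
  unfold Spec_analyze_tree
  have hminv := minv_foldl log.toList [] [] 0 minv_init
  have F := pfacts_of_minv _ _ _ hminv
  have hmz := model_length log.toList [] [] 0
  simp only [List.length_nil, Nat.zero_add] at hmz
  have hmN : (log.toList.foldl mstep ([], [], 0)).1.length < n.toNat := by
    omega
  -- A's side: tree, first BFS, second BFS
  have hPA := parseA_model log.toList n.toNat [] [] 0
  rw [show buildTree n.toNat ([] : List (Nat × Nat)) = List.replicate n.toNat [] from rfl] at hPA
  simp only [List.length_nil, Nat.zero_add] at hPA
  have hT_A : (log.toList.foldl stepA (List.replicate n.toNat [], ([] : List Nat), 0, 1)).1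
      = buildTree n.toNat (log.toList.foldl mstep ([], [], 0)).1 := by
    rw [hPA]
  rw [a_eq n log _ hT_A]
  have hKM : (bestF (log.toList.foldl mstep ([], [], 0)).1).2
      ≤ (log.toList.foldl mstep ([], [], 0)).1.length := (bestF_spec _).1
  have hDF := dfacts_B (log.toList.foldl mstep ([], [], 0)).1 F n.toNat hmN
    (bestF (log.toList.foldl mstep ([], [], 0)).1).2 hKM
  rw [bfsA_far (log.toList.foldl mstep ([], [], 0)).1 n.toNat F hmN,
      bfsA2_dist (log.toList.foldl mstep ([], [], 0)).1 n.toNat F hmN _ _ hDF]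
  -- B's side: parse, deepest node, path marking, distance pass
  have hPB := parseP_model log.toList n.toNat [] [] 0 minv_init
    (by simp only [List.length_nil, Nat.zero_add]; omega)
  rw [parList_nil, depList_nil] at hPB
  simp only [List.length_nil, Nat.zero_add] at hPB
  rw [alt_eq n log _ _ _ _ _ hPB]
  rw [deepScan_eq_bestF n.toNat (log.toList.foldl mstep ([], [], 0)).1 hmN]
  rw [depList_getD n.toNat (log.toList.foldl mstep ([], [], 0)).1
      (bestF (log.toList.foldl mstep ([], [], 0)).1).2 (by omega)]
  rw [show markPath (parList n.toNat (log.toList.foldl mstep ([], [], 0)).1)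
        (List.replicate n.toNat false) (bestF (log.toList.foldl mstep ([], [], 0)).1).2
        ((bestF (log.toList.foldl mstep ([], [], 0)).1).2 + 1)
      = onpB n.toNat (log.toList.foldl mstep ([], [], 0)).1
          (bestF (log.toList.foldl mstep ([], [], 0)).1).2 from rfl]
  obtain ⟨_, he0, hub, hat⟩ := ecc_fold (log.toList.foldl mstep ([], [], 0)).1 F n.toNat hmN
    (bestF (log.toList.foldl mstep ([], [], 0)).1).2 hKM
    ((log.toList.foldl mstep ([], [], 0)).1.length + 1) (le_refl _)
  rw [max_eq_ecc n.toNat (log.toList.foldl mstep ([], [], 0)).1.length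
    (DB n.toNat (log.toList.foldl mstep ([], [], 0)).1
      (bestF (log.toList.foldl mstep ([], [], 0)).1).2)
    (by omega) hmN (bestF (log.toList.foldl mstep ([], [], 0)).1).2 hKM hDF.d0
    _ he0 (fun u hu => hub u (by omega))
    (by
      rcases hat with h | ⟨u, hu, hval⟩
      · exact Or.inl h
      · exact Or.inr ⟨u, by omega, hval⟩)]
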